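-- pv_equiv track=rewrite | github.com/achieve0410/Algorithm | 3184.py | checkMap
-- ===== SOURCE A (Python) =====
-- from collections import deque
--
-- def checkMap(mmap):
--     rows, cols = len(mmap), len(mmap[0])
--     dx, dy = [-1, 1, 0, 0], [0, 0, -1, 1]
--     visited = [[0 for _ in range(cols)]for _ in range(rows)]
--     queue = deque()
--     sheeps, wolfs = 0, 0
--
--     for row in range(rows):
--         for col in range(cols):
--             if visited[row][col] == 0:
--                 if mmap[row][col] == 'o' or mmap[row][col] == 'v':
--                     sheep, wolf = 0, 0
--
--                     queue.append([row, col])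
--                     while queue:
--                         x, y = queue.popleft()
--                         visited[x][y] = 1
--
--                         if mmap[x][y] == 'o':
--                             sheep += 1
--                         elif mmap[x][y] == 'v':
--                             wolf += 1
--
--                         for i in range(4):
--                             X, Y = x+dx[i], y+dy[i]
--
--                             if X>=0 and X<rows and Y>=0 and Y<cols:
--                                 if mmap[X][Y] != '#':
--                                     if visited[X][Y]==0 and [X, Y] not in queue:
--                                         queue.append([X, Y])
--                     if sheep>wolf:
--                         sheeps += sheep
--                     else:
--                         wolfs += wolf
--
--                 else:
--                     continue
--     return [sheeps, wolfs]
-- ===== SOURCE B (Python) =====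
-- def checkMap(mmap):
--     # Union-find ("link by index": the smaller cell index becomes the root) over
--     # the non-'#' cells, then one counting pass keyed by component root.
--     rows, cols = len(mmap), len(mmap[0])
--     n = rows * cols
--     parent = list(range(n))
--
--     def find(i):
--         while parent[i] != i:
--             i = parent[i]
--         return i
--
--     for r in range(rows):
--         for c in range(cols):
--             if mmap[r][c] != '#':
--                 for (R, C) in ((r + 1, c), (r, c + 1)):
--                     if R < rows and C < cols and mmap[R][C] != '#':
--                         a, b = find(r * cols + c), find(R * cols + C)
--                         if a != b:
--                             if a < b:
--                                 parent[b] = a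
--                             else:
--                                 parent[a] = b
--
--     counts = {}
--     for r in range(rows):
--         for c in range(cols):
--             ch = mmap[r][c]
--             if ch == 'o' or ch == 'v':
--                 root = find(r * cols + c)
--                 s, w = counts.get(root, (0, 0))
--                 counts[root] = (s + 1, w) if ch == 'o' else (s, w + 1)
--
--     sheeps, wolfs = 0, 0
--     for s, w in counts.values():
--         if s > w:
--             sheeps += s
--         else:
--             wolfs += w
--     return [sheeps, wolfs]
-- ===== Notes on version B (the rewrite author's own statement) =====
-- stated objective: alternative
-- what changed: Replaced the per-component BFS (whose every enqueue scans the whole deque for membership) by a disjoint-set union-find over the grid cells: one pass unions adjacent non-'#' cells, a second pass tallies 'o'/'v' per component root, and a final pass over the per-root tallies sums the winners.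
import Mathlib
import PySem

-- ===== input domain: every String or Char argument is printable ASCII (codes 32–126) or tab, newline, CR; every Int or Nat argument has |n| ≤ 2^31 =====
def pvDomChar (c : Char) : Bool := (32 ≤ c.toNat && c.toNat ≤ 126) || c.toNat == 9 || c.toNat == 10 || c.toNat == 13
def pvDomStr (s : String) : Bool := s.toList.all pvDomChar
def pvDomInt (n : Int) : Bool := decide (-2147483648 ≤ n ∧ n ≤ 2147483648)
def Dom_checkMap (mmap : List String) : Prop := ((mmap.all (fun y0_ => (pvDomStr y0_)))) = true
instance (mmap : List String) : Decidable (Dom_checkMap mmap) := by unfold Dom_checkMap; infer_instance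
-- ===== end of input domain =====

-- B replaces A's BFS (which rescans the whole deque on every enqueue) by a union-find
-- over the grid cells: union adjacent non-'#' cells, then tally 'o'/'v' per root.

-- mmap[x][y] : Option Char (none = IndexError); shared by both ports (both Pythons index the grid this way)
def cellC (mmap : List String) (x y : Int) : Option Char :=
  match PySem.List.pyGet? mmap x with
  | some s => PySem.Str.pyGet? s y
  | none => none

-- ===== PORT A =====
-- visited[x][y] read/write; every use in A has 0 ≤ x < rows, 0 ≤ y < cols, where these are exact
def getV (v : List (List Int)) (x y : Int) : Int :=
  (v.getD x.toNat []).getD y.toNat 0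

def setV (v : List (List Int)) (x y : Int) : List (List Int) :=
  v.set x.toNat ((v.getD x.toNat []).set y.toNat 1)

-- body of A's neighbour check for one candidate (X, Y)
def enqStepA (mmap : List String) (rows cols : Int) (v : List (List Int))
    (q : List (Int × Int)) (c : Int × Int) : List (Int × Int) :=
  if 0 ≤ c.1 ∧ c.1 < rows ∧ 0 ≤ c.2 ∧ c.2 < cols then
    if cellC mmap c.1 c.2 ≠ some '#' then
      if getV v c.1 c.2 = 0 ∧ c ∉ q then q ++ [c] else q
    else q
  else q

-- for i in range(4): X, Y = x+dx[i], y+dy[i]; …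
def enqA (mmap : List String) (rows cols : Int) (v : List (List Int))
    (q : List (Int × Int)) (x y : Int) : List (Int × Int) :=
  (PySem.List.pyRange 0 4 1).foldl
    (fun q i =>
      enqStepA mmap rows cols v q
        (x + PySem.List.pyGetD [-1, 1, 0, 0] i 0, y + PySem.List.pyGetD [0, 0, -1, 1] i 0)) q

-- the 'while queue:' loop; fuel is only a totality guard, proved sufficient (bfsA_correct)
def bfsA (mmap : List String) (rows cols : Int) :
    Nat → List (List Int) → List (Int × Int) → Int → Int → List (List Int) × Int × Int
  | 0, v, _, sheep, wolf => (v, sheep, wolf)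
  | fuel + 1, v, q, sheep, wolf =>
    match q with
    | [] => (v, sheep, wolf)
    | (x, y) :: rest =>
      let v' := setV v x y
      let sheep' := if cellC mmap x y = some 'o' then sheep + 1 else sheep
      let wolf' := if cellC mmap x y = some 'o' then wolf
                   else if cellC mmap x y = some 'v' then wolf + 1 else wolf
      bfsA mmap rows cols fuel v' (enqA mmap rows cols v' rest x y) sheep' wolf'

-- body of A's double loop over (row, col)
def outStepA (mmap : List String) (rows cols : Int)
    (st : List (List Int) × Int × Int) (row col : Int) : List (List Int) × Int × Int :=
  if getV st.1 row col = 0 then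
    if cellC mmap row col = some 'o' ∨ cellC mmap row col = some 'v' then
      match bfsA mmap rows cols (5 * (rows * cols).toNat + 1) st.1 [(row, col)] 0 0 with
      | (v', sheep, wolf) =>
        if sheep > wolf then (v', st.2.1 + sheep, st.2.2) else (v', st.2.1, st.2.2 + wolf)
    else st
  else st

def checkMap (mmap : List String) : List Int :=
  let rows : Int := PySem.List.len mmap
  -- len(mmap[0]) : raises on mmap = [] (outside Pre_checkMap)
  let cols : Int := PySem.Str.len ((PySem.List.pyGet? mmap 0).getD "")
  let st :=
    (PySem.List.pyRange 0 rows 1).foldl (fun st row =>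
      (PySem.List.pyRange 0 cols 1).foldl (fun st col =>
        outStepA mmap rows cols st row col) st)
      (List.replicate rows.toNat (List.replicate cols.toNat 0), 0, 0)
  [st.2.1, st.2.2]

-- ===== PORT B =====
-- 'while parent[i] != i: i = parent[i]'; fuel is only a totality guard, proved sufficient
-- (findB_root: under the DSU invariant parent[i] < i off roots, so parent.length+1 steps suffice);
-- parent[i] via pyGetD: every reachable read is in range (proved), so the default is never used
def findB (parent : List Int) : Nat → Int → Int
  | 0, i => i
  | f + 1, i =>
    let p := PySem.List.pyGetD parent i 0
    if p = i then i else findB parent f p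

def rootB (parent : List Int) (i : Int) : Int := findB parent (parent.length + 1) i

-- 'a, b = find(i), find(j); if a != b: if a < b: parent[b] = a else: parent[a] = b'
def unionB (parent : List Int) (i j : Int) : List Int :=
  let a := rootB parent i
  let b := rootB parent j
  if a ≠ b then
    if a < b then parent.set b.toNat a else parent.set a.toNat b
  else parent

-- the body of B's first double loop: union with the down/right neighbours
def edgeStepB (mmap : List String) (rows cols : Int) (parent : List Int)
    (r c : Int) : List Int :=
  if cellC mmap r c ≠ some '#' then
    [(r + 1, c), (r, c + 1)].foldl
      (fun par q =>
        if q.1 < rows ∧ q.2 < cols ∧ cellC mmap q.1 q.2 ≠ some '#' then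
          unionB par (r * cols + c) (q.1 * cols + q.2)
        else par) parent
  else parent

-- the body of B's second double loop: tally the cell on its component root
def countStepB (mmap : List String) (cols : Int) (parent : List Int)
    (d : PySem.Dict Int (Int × Int)) (r c : Int) : PySem.Dict Int (Int × Int) :=
  let ch := cellC mmap r c
  if ch = some 'o' ∨ ch = some 'v' then
    let root := rootB parent (r * cols + c)
    let sw := PySem.Dict.getD d root (0, 0)
    PySem.Dict.insert d root (if ch = some 'o' then (sw.1 + 1, sw.2) else (sw.1, sw.2 + 1))
  else d

def checkMap_alt (mmap : List String) : List Int :=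
  let rows : Int := PySem.List.len mmap
  -- len(mmap[0]) : raises on mmap = [] (outside Pre_checkMap)
  let cols : Int := PySem.Str.len ((PySem.List.pyGet? mmap 0).getD "")
  let parent0 : List Int := PySem.List.pyRange 0 (rows * cols) 1
  let parent :=
    (PySem.List.pyRange 0 rows 1).foldl (fun par r =>
      (PySem.List.pyRange 0 cols 1).foldl (fun par c =>
        edgeStepB mmap rows cols par r c) par) parent0
  let d :=
    (PySem.List.pyRange 0 rows 1).foldl (fun d r =>
      (PySem.List.pyRange 0 cols 1).foldl (fun d c =>
        countStepB mmap cols parent d r c) d) PySem.Dict.empty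
  let st :=
    (PySem.Dict.values d).foldl
      (fun acc sw => if sw.1 > sw.2 then (acc.1 + sw.1, acc.2) else (acc.1, acc.2 + sw.2))
      ((0 : Int), (0 : Int))
  [st.1, st.2]

-- ===== PRECONDITION & SPEC =====
-- Pre_ excludes exactly the inputs on which Python A raises IndexError: the empty grid
-- (mmap[0]) and grids where some row is shorter than row 0 (A reads mmap[row][col] for
-- every col < len(mmap[0]) while scanning, so every such grid raises).
def Pre_checkMap (mmap : List String) : Prop :=
  mmap ≠ [] ∧ ∀ s ∈ mmap, PySem.Str.len (mmap.headD "") ≤ PySem.Str.len s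
instance (mmap : List String) : Decidable (Pre_checkMap mmap) := by
  unfold Pre_checkMap; infer_instance

def pvWitness_checkMap : List String := ["ov.", "#o."]

def Spec_checkMap (mmap : List String) (out : List Int) : Prop := out = checkMap_alt mmap
instance (mmap : List String) (out : List Int) : Decidable (Spec_checkMap mmap out) := by
  unfold Spec_checkMap; infer_instance

-- ===== CLAIM (what is proved, stated in full; the proofs are below) =====
def Claim_equal_checkMap : Prop :=
  ∀ (mmap : List String), Dom_checkMap mmap → Pre_checkMap mmap →
    Spec_checkMap mmap (checkMap mmap)

-- grid geometry
abbrev inB (rows cols : Int) (p : Int × Int) : Prop :=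
  0 ≤ p.1 ∧ p.1 < rows ∧ 0 ≤ p.2 ∧ p.2 < cols

abbrev opn (mmap : List String) (rows cols : Int) (p : Int × Int) : Prop :=
  inB rows cols p ∧ cellC mmap p.1 p.2 ≠ some '#'

def cands (x y : Int) : List (Int × Int) := [(x - 1, y), (x + 1, y), (x, y - 1), (x, y + 1)]

abbrev adjR (mmap : List String) (rows cols : Int) (p q : Int × Int) : Prop :=
  q ∈ cands p.1 p.2 ∧ opn mmap rows cols q

def Rch (mmap : List String) (rows cols : Int) (s p : Int × Int) : Prop :=
  Relation.ReflTransGen (adjR mmap rows cols) s p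

noncomputable def grid (rows cols : Int) : Finset (Int × Int) := Finset.Ico 0 rows ×ˢ Finset.Ico 0 cols

abbrev visM (v : List (List Int)) (p : Int × Int) : Prop := getV v p.1 p.2 = 1

def wfM (rows cols : Int) (v : List (List Int)) : Prop :=
  v.length = rows.toNat ∧ (∀ r ∈ v, r.length = cols.toNat) ∧ (∀ r ∈ v, ∀ e ∈ r, e = 0 ∨ e = 1)

-- counting: number of cells of the grid in (visNow \ visOld) carrying character c
noncomputable def cntA (mmap : List String) (rows cols : Int) (v₀ v : List (List Int)) (c : Char) : Int :=
  (((grid rows cols).filter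
    (fun p => visM v p ∧ ¬ visM v₀ p ∧ cellC mmap p.1 p.2 = some c)).card : Int)

noncomputable def uCntA (rows cols : Int) (v : List (List Int)) : Nat :=
  ((grid rows cols).filter (fun p => ¬ visM v p)).card

-- ---------- generic Finset counting helpers ----------
lemma card_bump {α : Type} [DecidableEq α] (s : Finset α) (P Q : α → Prop)
    [DecidablePred P] [DecidablePred Q] (x : α) (hx : x ∈ s) (hPx : ¬ P x) (hQx : Q x)
    (h : ∀ a ∈ s, a ≠ x → (Q a ↔ P a)) :
    (s.filter Q).card = (s.filter P).card + 1 := by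
  have key : s.filter Q = insert x (s.filter P) := by
    ext a
    simp only [Finset.mem_filter, Finset.mem_insert]
    constructor
    · rintro ⟨ha, hQ⟩
      by_cases hax : a = x
      · exact Or.inl hax
      · exact Or.inr ⟨ha, (h a ha hax).mp hQ⟩
    · rintro (rfl | ⟨ha, hP⟩)
      · exact ⟨hx, hQx⟩
      · by_cases hax : a = x
        · subst hax; exact absurd hP hPx
        · exact ⟨ha, (h a ha hax).mpr hP⟩
  rw [key, Finset.card_insert_of_notMem]
  simp [Finset.mem_filter, hPx]

lemma card_same {α : Type} [DecidableEq α] (s : Finset α) (P Q : α → Prop)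
    [DecidablePred P] [DecidablePred Q] (h : ∀ a ∈ s, Q a ↔ P a) :
    (s.filter Q).card = (s.filter P).card := by
  congr 1
  exact Finset.filter_congr h

lemma mem_grid (rows cols : Int) (p : Int × Int) :
    p ∈ grid rows cols ↔ inB rows cols p := by
  simp only [grid, Finset.mem_product, Finset.mem_Ico, inB]
  tauto

lemma grid_card (rows cols : Int) (h1 : 0 ≤ rows) (h2 : 0 ≤ cols) :
    (grid rows cols).card = (rows * cols).toNat := by
  have : (rows * cols).toNat = rows.toNat * cols.toNat := by
    conv_lhs => rw [← Int.toNat_of_nonneg h1, ← Int.toNat_of_nonneg h2]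
    rw [← Nat.cast_mul, Int.toNat_natCast]
  rw [this, grid, Finset.card_product]
  simp [Int.card_Ico]

-- ---------- visited-matrix lemmas ----------
lemma wfM_setV (rows cols : Int) (v : List (List Int)) (hwf : wfM rows cols v) (x y : Int) :
    wfM rows cols (setV v x y) := by
  obtain ⟨h1, h2, h3⟩ := hwf
  rcases Nat.lt_or_ge x.toNat v.length with hlt | hge
  · have hmem : v.getD x.toNat [] ∈ v := by
      rw [List.getD_eq_getElem?_getD, List.getElem?_eq_getElem hlt]
      exact List.getElem_mem hlt
    refine ⟨by simpa [setV] using h1, ?_, ?_⟩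
    · intro r hr
      rcases List.mem_or_eq_of_mem_set hr with h | rfl
      · exact h2 _ h
      · simpa using h2 _ hmem
    · intro r hr e he
      rcases List.mem_or_eq_of_mem_set hr with h | rfl
      · exact h3 _ h e he
      · rcases List.mem_or_eq_of_mem_set he with h' | rfl
        · exact h3 _ hmem e h'
        · exact Or.inr rfl
  · rw [setV, List.set_eq_of_length_le hge]
    exact ⟨h1, h2, h3⟩

lemma getV_setV_self (rows cols : Int) (v : List (List Int)) (hwf : wfM rows cols v)
    {x y : Int} (h : inB rows cols (x, y)) : getV (setV v x y) x y = 1 := by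
  obtain ⟨h1, h2, -⟩ := hwf
  obtain ⟨hx0, hxr, hy0, hyc⟩ := h
  have hlt : x.toNat < v.length := by omega
  have hrow : (v.getD x.toNat []) = v[x.toNat] := by
    simp only [List.getD_eq_getElem?_getD, List.getElem?_eq_getElem hlt, Option.getD_some]
  have hrow' : v[x.toNat]?.getD [] = v[x.toNat] := by
    simp [List.getElem?_eq_getElem hlt]
  have hylt : y.toNat < v[x.toNat].length := by
    rw [h2 _ (List.getElem_mem hlt)]; omega
  rw [getV, setV]
  simp only [List.getD_eq_getElem?_getD, List.getElem?_set_self hlt, Option.getD_some, hrow',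
    List.getElem?_set_self hylt]

lemma getV_setV_other (v : List (List Int)) {x y a b : Int}
    (hx : 0 ≤ x) (hy : 0 ≤ y) (ha : 0 ≤ a) (hb : 0 ≤ b) (hne : (a, b) ≠ (x, y)) :
    getV (setV v x y) a b = getV v a b := by
  rcases Nat.lt_or_ge x.toNat v.length with hlt | hge
  · by_cases hax : a = x
    · subst hax
      have hby : b ≠ y := by
        intro hby; exact hne (by rw [hby])
      have hbn : b.toNat ≠ y.toNat := by omega
      rw [getV, getV, setV]
      simp only [List.getD_eq_getElem?_getD, List.getElem?_set_self hlt, Option.getD_some,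
        Option.getD_some]
      rw [List.getElem?_set_ne hbn.symm]
    · have hne2 : x.toNat ≠ a.toNat := by omega
      rw [getV, getV, setV]
      simp only [List.getD_eq_getElem?_getD, List.getElem?_set_ne hne2]
  · rw [setV, List.set_eq_of_length_le hge]

lemma getV_zero_iff (rows cols : Int) (v : List (List Int)) (hwf : wfM rows cols v)
    {x y : Int} (h : inB rows cols (x, y)) : getV v x y = 0 ↔ ¬ visM v (x, y) := by
  obtain ⟨h1, h2, h3⟩ := hwf
  obtain ⟨hx0, hxr, hy0, hyc⟩ := h
  have hlt : x.toNat < v.length := by omega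
  have hrow : (v.getD x.toNat []) = v[x.toNat] := by
    simp only [List.getD_eq_getElem?_getD, List.getElem?_eq_getElem hlt, Option.getD_some]
  have hylt : y.toNat < v[x.toNat].length := by
    rw [h2 _ (List.getElem_mem hlt)]; omega
  have he : getV v x y ∈ v[x.toNat] := by
    rw [getV, hrow]
    simp only [List.getD_eq_getElem?_getD, List.getElem?_eq_getElem hylt, Option.getD_some]
    exact List.getElem_mem hylt
  have := h3 _ (List.getElem_mem hlt) _ he
  simp only [visM]
  omega

-- ---------- reachability lemmas ----------
lemma Rch_opn (mmap : List String) (rows cols : Int) {s p : Int × Int}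
    (hs : opn mmap rows cols s) (h : Rch mmap rows cols s p) : opn mmap rows cols p := by
  induction h with
  | refl => exact hs
  | tail _ h₂ _ => exact h₂.2

lemma mem_cands_symm {p q : Int × Int} (h : q ∈ cands p.1 p.2) : p ∈ cands q.1 q.2 := by
  simp only [cands, List.mem_cons, Prod.ext_iff] at h ⊢
  obtain ⟨x, y⟩ := p; obtain ⟨a, b⟩ := q
  simp at h ⊢
  omega

lemma Rch_symm (mmap : List String) (rows cols : Int) {s p : Int × Int}
    (hs : opn mmap rows cols s) (h : Rch mmap rows cols s p) : Rch mmap rows cols p s := by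
  induction h with
  | refl => exact Relation.ReflTransGen.refl
  | tail hab hbc ih =>
    rename_i b c
    have hb : opn mmap rows cols b := Rch_opn mmap rows cols hs hab
    exact Relation.ReflTransGen.trans
      (Relation.ReflTransGen.single ⟨mem_cands_symm hbc.1, hb⟩) ih

-- ---------- A-side enqueue fold lemmas ----------
lemma enqA_eq (mmap : List String) (rows cols : Int) (v : List (List Int))
    (q : List (Int × Int)) (x y : Int) :
    enqA mmap rows cols v q x y = (cands x y).foldl (enqStepA mmap rows cols v) q := by
  rw [enqA, show PySem.List.pyRange 0 4 1 = [0, 1, 2, 3] from by decide]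
  simp only [List.foldl, cands]
  norm_num [PySem.List.pyGetD]
  rw [show ([-1, 1, 0, 0] : List Int)[Int.toNat 2] = 0 from rfl,
    show ([-1, 1, 0, 0] : List Int)[Int.toNat 3] = 0 from rfl,
    show ([0, 0, -1, 1] : List Int)[Int.toNat 2] = -1 from rfl,
    show ([0, 0, -1, 1] : List Int)[Int.toNat 3] = 1 from rfl]
  norm_num [sub_eq_add_neg]

lemma enqStepA_cases (mmap : List String) (rows cols : Int) (v : List (List Int))
    (q : List (Int × Int)) (c : Int × Int) :
    enqStepA mmap rows cols v q c = q ∨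
      (enqStepA mmap rows cols v q c = q ++ [c] ∧ opn mmap rows cols c ∧
        getV v c.1 c.2 = 0 ∧ c ∉ q) := by
  rw [enqStepA]
  split_ifs with h1 h2 h3
  · exact Or.inr ⟨rfl, ⟨h1, h2⟩, h3.1, h3.2⟩
  all_goals exact Or.inl rfl

lemma enqF_sub (mmap : List String) (rows cols : Int) (v : List (List Int)) :
    ∀ (cs q : List (Int × Int)) (p : Int × Int), p ∈ q →
      p ∈ cs.foldl (enqStepA mmap rows cols v) q := by
  intro cs
  induction cs with
  | nil => intro q p hp; simpa using hp
  | cons c cs ih =>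
    intro q p hp
    rw [List.foldl_cons]
    apply ih
    rcases enqStepA_cases mmap rows cols v q c with h | ⟨h, -⟩ <;> rw [h]
    · exact hp
    · exact List.mem_append_left _ hp

lemma enqF_mem (mmap : List String) (rows cols : Int) (v : List (List Int)) :
    ∀ (cs q : List (Int × Int)) (p : Int × Int),
      p ∈ cs.foldl (enqStepA mmap rows cols v) q →
      p ∈ q ∨ (p ∈ cs ∧ opn mmap rows cols p ∧ getV v p.1 p.2 = 0) := by
  intro cs
  induction cs with
  | nil => intro q p hp; simpa using hp
  | cons c cs ih =>
    intro q p hp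
    rw [List.foldl_cons] at hp
    rcases ih _ p hp with h | ⟨h1, h2, h3⟩
    · rcases enqStepA_cases mmap rows cols v q c with hc | ⟨hc, ho, hg, -⟩ <;> rw [hc] at h
      · exact Or.inl h
      · rcases List.mem_append.mp h with h | h
        · exact Or.inl h
        · simp only [List.mem_singleton] at h
          subst h
          exact Or.inr ⟨List.mem_cons_self, ho, hg⟩
    · exact Or.inr ⟨List.mem_cons_of_mem _ h1, h2, h3⟩

lemma enqF_add (mmap : List String) (rows cols : Int) (v : List (List Int)) :
    ∀ (cs q : List (Int × Int)) (p : Int × Int),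
      p ∈ cs → opn mmap rows cols p → getV v p.1 p.2 = 0 →
      p ∈ cs.foldl (enqStepA mmap rows cols v) q := by
  intro cs
  induction cs with
  | nil => intro q p hp; simp at hp
  | cons c cs ih =>
    intro q p hp ho hg
    rw [List.foldl_cons]
    rcases List.mem_cons.mp hp with rfl | hp
    · by_cases hq : p ∈ q
      · apply enqF_sub
        rcases enqStepA_cases mmap rows cols v q p with h | ⟨h, -⟩ <;> rw [h]
        · exact hq
        · exact List.mem_append_left _ hq
      · apply enqF_sub
        rw [enqStepA, if_pos ho.1, if_pos ho.2, if_pos ⟨hg, hq⟩]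
        exact List.mem_append_right _ (List.mem_singleton.mpr rfl)
    · exact ih _ p hp ho hg

lemma enqF_nodup (mmap : List String) (rows cols : Int) (v : List (List Int)) :
    ∀ (cs q : List (Int × Int)), q.Nodup → (cs.foldl (enqStepA mmap rows cols v) q).Nodup := by
  intro cs
  induction cs with
  | nil => intro q h; simpa using h
  | cons c cs ih =>
    intro q h
    rw [List.foldl_cons]
    apply ih
    rcases enqStepA_cases mmap rows cols v q c with hc | ⟨hc, -, -, hnq⟩ <;> rw [hc]
    · exact h
    · exact h.append (List.nodup_singleton c)
        (fun a ha ha' => hnq ((List.mem_singleton.mp ha') ▸ ha))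

lemma enqF_len (mmap : List String) (rows cols : Int) (v : List (List Int)) :
    ∀ (cs q : List (Int × Int)),
      (cs.foldl (enqStepA mmap rows cols v) q).length ≤ q.length + cs.length := by
  intro cs
  induction cs with
  | nil => intro q; simp
  | cons c cs ih =>
    intro q
    rw [List.foldl_cons]
    have h1 : (enqStepA mmap rows cols v q c).length ≤ q.length + 1 := by
      rcases enqStepA_cases mmap rows cols v q c with hc | ⟨hc, -⟩ <;> rw [hc] <;> simp
    calc (cs.foldl (enqStepA mmap rows cols v) (enqStepA mmap rows cols v q c)).length
        ≤ (enqStepA mmap rows cols v q c).length + cs.length := ih _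
      _ ≤ q.length + 1 + cs.length := by omega
      _ = q.length + (c :: cs).length := by simp; omega

-- ---------- A-side BFS main lemma ----------
lemma bfs_final (mmap : List String) (rows cols : Int) (s : Int × Int)
    (v₀ v : List (List Int)) (hs : opn mmap rows cols s)
    (h4 : ∀ p, inB rows cols p → visM v p → visM v₀ p ∨ Rch mmap rows cols s p)
    (h5 : ∀ p, inB rows cols p → visM v₀ p → visM v p)
    (h6 : ∀ p, inB rows cols p → visM v p → ∀ r, adjR mmap rows cols p r → visM v r)
    (h7 : visM v s) :
    ∀ p, inB rows cols p → (visM v p ↔ visM v₀ p ∨ Rch mmap rows cols s p) := by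
  intro p hp
  constructor
  · exact h4 p hp
  · rintro (h | h)
    · exact h5 p hp h
    · clear hp
      induction h with
      | refl => exact h7
      | tail hab hbc ih2 =>
        rename_i b c
        have hb : inB rows cols b := (Rch_opn mmap rows cols hs hab).1
        exact h6 b hb ih2 c hbc

lemma bfsA_correct (mmap : List String) (rows cols : Int) (s : Int × Int)
    (v₀ : List (List Int)) (hs : opn mmap rows cols s) :
    ∀ (fuel : Nat) (v : List (List Int)) (q : List (Int × Int)) (sheep wolf : Int),
      wfM rows cols v →
      (∀ p ∈ q, opn mmap rows cols p ∧ ¬ visM v p ∧ Rch mmap rows cols s p) →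
      q.Nodup →
      (∀ p, inB rows cols p → visM v p → visM v₀ p ∨ Rch mmap rows cols s p) →
      (∀ p, inB rows cols p → visM v₀ p → visM v p) →
      (∀ p, inB rows cols p → visM v p → ∀ r, adjR mmap rows cols p r → visM v r ∨ r ∈ q) →
      (s ∈ q ∨ visM v s) →
      sheep = cntA mmap rows cols v₀ v 'o' →
      wolf = cntA mmap rows cols v₀ v 'v' →
      q.length + 5 * uCntA rows cols v ≤ fuel →
      ∃ v₁, bfsA mmap rows cols fuel v q sheep wolf =
          (v₁, cntA mmap rows cols v₀ v₁ 'o', cntA mmap rows cols v₀ v₁ 'v') ∧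
        wfM rows cols v₁ ∧
        (∀ p, inB rows cols p → (visM v₁ p ↔ visM v₀ p ∨ Rch mmap rows cols s p)) := by
  intro fuel
  induction fuel with
  | zero =>
    intro v q sheep wolf h1 h2 h3 h4 h5 h6 h7 h8 h9 h10
    have hq : q = [] := by
      cases q with
      | nil => rfl
      | cons a t => simp at h10
    subst hq
    refine ⟨v, by simp [bfsA, h8, h9], h1, ?_⟩
    exact bfs_final mmap rows cols s v₀ v hs h4 h5
      (fun p hp hv r hadj => (h6 p hp hv r hadj).resolve_right (by simp))
      (h7.resolve_left (by simp))
  | succ n ih =>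
    intro v q sheep wolf h1 h2 h3 h4 h5 h6 h7 h8 h9 h10
    cases q with
    | nil =>
      refine ⟨v, by simp [bfsA, h8, h9], h1, ?_⟩
      exact bfs_final mmap rows cols s v₀ v hs h4 h5
        (fun p hp hv r hadj => (h6 p hp hv r hadj).resolve_right (by simp))
        (h7.resolve_left (by simp))
    | cons hd rest =>
      obtain ⟨x, y⟩ := hd
      obtain ⟨hxo, hxnv, hxr⟩ := h2 (x, y) List.mem_cons_self
      have hinx : inB rows cols (x, y) := hxo.1
      have hwf' : wfM rows cols (setV v x y) := wfM_setV rows cols v h1 x y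
      have hself : visM (setV v x y) (x, y) := getV_setV_self rows cols v h1 hinx
      have hother : ∀ p, inB rows cols p → p ≠ (x, y) →
          (visM (setV v x y) p ↔ visM v p) := by
        rintro ⟨a, b⟩ hp hne
        have := getV_setV_other v (x := x) (y := y) (a := a) (b := b)
          (by exact hinx.1) (by exact hinx.2.2.1) hp.1 hp.2.2.1 hne
        simp only [visM, this]
      have hmono : ∀ p, inB rows cols p → visM v p → visM (setV v x y) p := by
        intro p hp hv
        by_cases hpx : p = (x, y)
        · subst hpx; exact hself
        · exact (hother p hp hpx).mpr hv
      have hnrest : (x, y) ∉ rest ∧ rest.Nodup := List.nodup_cons.mp h3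
      -- queue invariants for the new queue
      have h2' : ∀ p ∈ enqA mmap rows cols (setV v x y) rest x y,
          opn mmap rows cols p ∧ ¬ visM (setV v x y) p ∧ Rch mmap rows cols s p := by
        intro p hp
        rw [enqA_eq] at hp
        rcases enqF_mem mmap rows cols (setV v x y) _ _ p hp with hp | ⟨hc, ho, hg⟩
        · obtain ⟨o, nv, r⟩ := h2 p (List.mem_cons_of_mem _ hp)
          have hne : p ≠ (x, y) := fun h => hnrest.1 (h ▸ hp)
          exact ⟨o, fun hv => nv ((hother p o.1 hne).mp hv), r⟩
        · refine ⟨ho, ?_, hxr.tail ⟨hc, ho⟩⟩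
          intro hv
          rw [visM] at hv
          omega
      have h3' : (enqA mmap rows cols (setV v x y) rest x y).Nodup := by
        rw [enqA_eq]
        exact enqF_nodup mmap rows cols _ _ _ hnrest.2
      have h4' : ∀ p, inB rows cols p → visM (setV v x y) p →
          visM v₀ p ∨ Rch mmap rows cols s p := by
        intro p hp hv
        by_cases hpx : p = (x, y)
        · subst hpx; exact Or.inr hxr
        · exact h4 p hp ((hother p hp hpx).mp hv)
      have h5' : ∀ p, inB rows cols p → visM v₀ p → visM (setV v x y) p :=
        fun p hp h0 => hmono p hp (h5 p hp h0)
      have h6' : ∀ p, inB rows cols p → visM (setV v x y) p →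
          ∀ r, adjR mmap rows cols p r →
            visM (setV v x y) r ∨ r ∈ enqA mmap rows cols (setV v x y) rest x y := by
        intro p hp hv r hadj
        by_cases hpx : p = (x, y)
        · subst hpx
          by_cases hvr : visM (setV v x y) r
          · exact Or.inl hvr
          · right
            rw [enqA_eq]
            apply enqF_add
            · exact hadj.1
            · exact hadj.2
            · obtain ⟨r1, r2⟩ := r
              exact (getV_zero_iff rows cols _ hwf' hadj.2.1).mpr hvr
        · rw [hother p hp hpx] at hv
          rcases h6 p hp hv r hadj with h | h
          · exact Or.inl (hmono r hadj.2.1 h)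
          · rcases List.mem_cons.mp h with rfl | hr
            · exact Or.inl hself
            · right
              rw [enqA_eq]
              exact enqF_sub mmap rows cols _ _ _ _ hr
      have h7' : s ∈ enqA mmap rows cols (setV v x y) rest x y ∨ visM (setV v x y) s := by
        by_cases hsx : s = (x, y)
        · subst hsx; exact Or.inr hself
        · rcases h7 with h | h
          · rcases List.mem_cons.mp h with h | h
            · exact absurd h hsx
            · left
              rw [enqA_eq]
              exact enqF_sub mmap rows cols _ _ _ _ h
          · exact Or.inr (hmono s hs.1 h)
      -- counting
      have hxgrid : (x, y) ∈ grid rows cols := (mem_grid rows cols _).mpr hinx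
      have hnv₀ : ¬ visM v₀ (x, y) := fun h0 => hxnv (h5 _ hinx h0)
      have hcnt_bump : ∀ c : Char, cellC mmap x y = some c →
          cntA mmap rows cols v₀ (setV v x y) c = cntA mmap rows cols v₀ v c + 1 := by
        intro c hc
        have := card_bump (grid rows cols)
          (fun p => visM v p ∧ ¬ visM v₀ p ∧ cellC mmap p.1 p.2 = some c)
          (fun p => visM (setV v x y) p ∧ ¬ visM v₀ p ∧ cellC mmap p.1 p.2 = some c)
          (x, y) hxgrid (fun h => hxnv h.1) ⟨hself, hnv₀, hc⟩
          (fun a ha hax => and_congr (hother a ((mem_grid rows cols a).mp ha) hax) Iff.rfl)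
        simp only [cntA, this]
        push_cast
        ring
      have hcnt_same : ∀ c : Char, cellC mmap x y ≠ some c →
          cntA mmap rows cols v₀ (setV v x y) c = cntA mmap rows cols v₀ v c := by
        intro c hc
        have := card_same (grid rows cols)
          (fun p => visM v p ∧ ¬ visM v₀ p ∧ cellC mmap p.1 p.2 = some c)
          (fun p => visM (setV v x y) p ∧ ¬ visM v₀ p ∧ cellC mmap p.1 p.2 = some c)
          (by
            intro a ha
            by_cases hax : a = (x, y)
            · subst hax
              exact iff_of_false (fun h => hc h.2.2) (fun h => hc h.2.2)
            · exact and_congr (hother a ((mem_grid rows cols a).mp ha) hax) Iff.rfl)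
        simp only [cntA, this]
      -- fuel bookkeeping
      have hU : uCntA rows cols v = uCntA rows cols (setV v x y) + 1 := by
        exact card_bump (grid rows cols)
          (fun p => ¬ visM (setV v x y) p) (fun p => ¬ visM v p)
          (x, y) hxgrid (not_not_intro hself) hxnv
          (fun a ha hax => not_congr (hother a ((mem_grid rows cols a).mp ha) hax).symm)
      have hlen : (enqA mmap rows cols (setV v x y) rest x y).length ≤ rest.length + 4 := by
        rw [enqA_eq]
        simpa [cands] using enqF_len mmap rows cols (setV v x y) (cands x y) rest
      have h10' : (enqA mmap rows cols (setV v x y) rest x y).length +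
          5 * uCntA rows cols (setV v x y) ≤ n := by
        simp only [List.length_cons] at h10
        omega
      -- counts passed to the recursive call
      have h8' : (if cellC mmap x y = some 'o' then sheep + 1 else sheep) =
          cntA mmap rows cols v₀ (setV v x y) 'o' := by
        by_cases hc : cellC mmap x y = some 'o'
        · rw [if_pos hc, hcnt_bump 'o' hc, h8]
        · rw [if_neg hc, hcnt_same 'o' hc, h8]
      have h9' : (if cellC mmap x y = some 'o' then wolf
            else if cellC mmap x y = some 'v' then wolf + 1 else wolf) =
          cntA mmap rows cols v₀ (setV v x y) 'v' := by
        by_cases hc : cellC mmap x y = some 'o'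
        · have : cellC mmap x y ≠ some 'v' := by rw [hc]; decide
          rw [if_pos hc, hcnt_same 'v' this, h9]
        · by_cases hc2 : cellC mmap x y = some 'v'
          · rw [if_neg hc, if_pos hc2, hcnt_bump 'v' hc2, h9]
          · rw [if_neg hc, if_neg hc2, hcnt_same 'v' hc2, h9]
      obtain ⟨v₁, heq, hwf₁, hch⟩ := ih (setV v x y)
        (enqA mmap rows cols (setV v x y) rest x y) _ _
        hwf' h2' h3' h4' h5' h6' h7' h8' h9' h10'
      refine ⟨v₁, ?_, hwf₁, hch⟩
      rw [show bfsA mmap rows cols (n + 1) v ((x, y) :: rest) sheep wolf =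
        bfsA mmap rows cols n (setV v x y) (enqA mmap rows cols (setV v x y) rest x y)
          (if cellC mmap x y = some 'o' then sheep + 1 else sheep)
          (if cellC mmap x y = some 'o' then wolf
            else if cellC mmap x y = some 'v' then wolf + 1 else wolf) from rfl]
      exact heq

lemma cntA_refl (mmap : List String) (rows cols : Int) (v : List (List Int)) (c : Char) :
    cntA mmap rows cols v v c = 0 := by
  have h : ((grid rows cols).filter
      (fun p => visM v p ∧ ¬ visM v p ∧ cellC mmap p.1 p.2 = some c)) = ∅ :=
    Finset.filter_eq_empty_iff.mpr (by rintro p - ⟨h1, h2, -⟩; exact h2 h1)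
  rw [cntA, h]
  simp

lemma uCntA_le (rows cols : Int) (h1 : 0 ≤ rows) (h2 : 0 ≤ cols) (v : List (List Int)) :
    uCntA rows cols v ≤ (rows * cols).toNat := by
  rw [← grid_card rows cols h1 h2]
  exact Finset.card_filter_le _ _

lemma getV_replicate (m n : Nat) (x y : Int) :
    getV (List.replicate m (List.replicate n (0 : Int))) x y = 0 := by
  simp only [getV, List.getD_eq_getElem?_getD, List.getElem?_replicate]
  by_cases h1 : x.toNat < m
  · simp only [if_pos h1, Option.getD_some]
    by_cases h2 : y.toNat < n <;> simp [h2]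
  · simp [h1]

-- ---------- cell encoding ----------
def encC (cols : Int) (p : Int × Int) : Int := p.1 * cols + p.2

lemma encC_bounds (rows cols : Int) {p : Int × Int} (h : inB rows cols p) :
    0 ≤ encC cols p ∧ encC cols p < rows * cols := by
  obtain ⟨h1, h2, h3, h4⟩ := h
  constructor
  · have := mul_nonneg h1 (le_trans h3 (le_of_lt h4))
    simp only [encC]; omega
  · have hstep : (p.1 + 1) * cols ≤ rows * cols :=
      mul_le_mul_of_nonneg_right (by omega) (by omega)
    have : p.1 * cols + cols ≤ rows * cols := by nlinarith
    simp only [encC]; omega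

lemma encC_inj (rows cols : Int) {p q : Int × Int} (hp : inB rows cols p)
    (hq : inB rows cols q) (h : encC cols p = encC cols q) : p = q := by
  obtain ⟨hp1, hp2, hp3, hp4⟩ := hp
  obtain ⟨hq1, hq2, hq3, hq4⟩ := hq
  simp only [encC] at h
  have h1 : p.1 = q.1 := by
    by_contra hne
    rcases lt_or_gt_of_ne hne with hlt | hlt
    · have : (p.1 + 1) * cols ≤ q.1 * cols :=
        mul_le_mul_of_nonneg_right (by omega) (by omega)
      nlinarith
    · have : (q.1 + 1) * cols ≤ p.1 * cols :=
        mul_le_mul_of_nonneg_right (by omega) (by omega)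
      nlinarith
  have h2 : p.2 = q.2 := by rw [h1] at h; omega
  exact Prod.ext h1 h2

-- ---------- row-major cell list ----------
def cellsL (rows cols : Int) : List (Int × Int) :=
  (PySem.List.pyRange 0 rows 1).flatMap
    (fun r => (PySem.List.pyRange 0 cols 1).map (fun c => (r, c)))

lemma mem_cellsL (rows cols : Int) (p : Int × Int) :
    p ∈ cellsL rows cols ↔ inB rows cols p := by
  simp only [cellsL, List.mem_flatMap, List.mem_map, PySem.List.mem_pyRange_one]
  constructor
  · rintro ⟨r, hr, c, hc, rfl⟩
    exact ⟨hr.1, hr.2, hc.1, hc.2⟩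
  · rintro ⟨h1, h2, h3, h4⟩
    exact ⟨p.1, ⟨h1, h2⟩, p.2, ⟨h3, h4⟩, rfl⟩

lemma nodup_pyRange_one (a b : Int) : (PySem.List.pyRange a b 1).Nodup := by
  rw [PySem.List.pyRange_one]
  exact (List.nodup_range).map (fun x y h => by omega)

lemma nodup_cellsL (rows cols : Int) : (cellsL rows cols).Nodup := by
  rw [cellsL, List.nodup_flatMap]
  constructor
  · intro r _
    exact (nodup_pyRange_one 0 cols).map (fun x y h => by
      simpa using congrArg Prod.snd h)
  · refine (List.Pairwise.imp ?_ ((nodup_pyRange_one 0 rows)))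
    intro a b hab
    intro x hxa hxb
    simp only [List.mem_map] at hxa hxb
    obtain ⟨c1, -, rfl⟩ := hxa
    obtain ⟨c2, -, h2⟩ := hxb
    exact hab (by simpa using congrArg Prod.fst h2.symm)

-- nested row/col loops as one fold over the row-major cell list
lemma nested_eq_cells {σ : Type} (rows cols : Int) (F : σ → Int → Int → σ) (s0 : σ) :
    (PySem.List.pyRange 0 rows 1).foldl (fun st r =>
      (PySem.List.pyRange 0 cols 1).foldl (fun st c => F st r c) st) s0
    = (cellsL rows cols).foldl (fun st p => F st p.1 p.2) s0 := by
  rw [cellsL, List.foldl_flatMap]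
  congr 1
  funext st r
  rw [List.foldl_map]

-- ---------- union-find: parent-array invariant and find/union lemmas ----------
def InvP (n : Nat) (par : List Int) : Prop :=
  par.length = n ∧ ∀ k : Nat, k < n → 0 ≤ par.getD k 0 ∧ par.getD k 0 ≤ (k : Int)

lemma pyGetD_toNat (par : List Int) {i : Int} (hi : 0 ≤ i) :
    PySem.List.pyGetD par i 0 = par.getD i.toNat 0 := by
  rw [← Int.toNat_of_nonneg hi, PySem.List.pyGetD_natCast]
  have h : (max i 0).toNat = i.toNat := by omega
  simp [List.getD_eq_getElem?_getD, h]

lemma getD_set_self' (l : List Int) {k : Nat} (hk : k < l.length) (v : Int) :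
    (l.set k v).getD k 0 = v := by
  simp [List.getD_eq_getElem?_getD, List.getElem?_set_self hk]

lemma getD_set_ne' (l : List Int) {k m : Nat} (h : m ≠ k) (v : Int) :
    (l.set k v).getD m 0 = l.getD m 0 := by
  simp [List.getD_eq_getElem?_getD, List.getElem?_set_ne (Ne.symm h)]

lemma findB_root {n : Nat} {par : List Int} (hI : InvP n par) :
    ∀ (f : Nat) (i : Int), 0 ≤ i → i < (n : Int) → i.toNat < f →
      0 ≤ findB par f i ∧ findB par f i ≤ i ∧
        par.getD (findB par f i).toNat 0 = findB par f i := by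
  intro f
  induction f with
  | zero => intro i _ _ h; omega
  | succ f ih =>
    intro i h1 h2 h3
    have hk : i.toNat < n := by omega
    obtain ⟨hp0, hpi⟩ := hI.2 i.toNat hk
    rw [show findB par (f + 1) i =
      (if PySem.List.pyGetD par i 0 = i then i else findB par f (PySem.List.pyGetD par i 0))
      from rfl, pyGetD_toNat par h1]
    by_cases heq : par.getD i.toNat 0 = i
    · rw [if_pos heq]
      exact ⟨h1, le_refl i, heq⟩
    · rw [if_neg heq]
      have hlt : par.getD i.toNat 0 < i := by
        rcases lt_or_eq_of_le (by omega : par.getD i.toNat 0 ≤ i) with h | h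
        · exact h
        · exact absurd h heq
      obtain ⟨a, b, c⟩ := ih (par.getD i.toNat 0) hp0 (by omega) (by omega)
      exact ⟨a, by omega, c⟩

lemma findB_fuel {n : Nat} {par : List Int} (hI : InvP n par) :
    ∀ (f g : Nat) (i : Int), 0 ≤ i → i < (n : Int) → i.toNat < f → i.toNat < g →
      findB par f i = findB par g i := by
  intro f
  induction f with
  | zero => intro g i _ _ h; omega
  | succ f ih =>
    intro g i h1 h2 h3 h4
    cases g with
    | zero => omega
    | succ g =>
      have hk : i.toNat < n := by omega
      obtain ⟨hp0, hpi⟩ := hI.2 i.toNat hk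
      rw [show findB par (f + 1) i =
        (if PySem.List.pyGetD par i 0 = i then i else findB par f (PySem.List.pyGetD par i 0))
        from rfl,
        show findB par (g + 1) i =
        (if PySem.List.pyGetD par i 0 = i then i else findB par g (PySem.List.pyGetD par i 0))
        from rfl, pyGetD_toNat par h1]
      by_cases heq : par.getD i.toNat 0 = i
      · simp only [if_pos heq]
      · simp only [if_neg heq]
        have hlt : par.getD i.toNat 0 < i := by
          rcases lt_or_eq_of_le (by omega : par.getD i.toNat 0 ≤ i) with h | h
          · exact h
          · exact absurd h heq
        exact ih g (par.getD i.toNat 0) hp0 (by omega) (by omega) (by omega)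

lemma rootB_spec {n : Nat} {par : List Int} (hI : InvP n par) {i : Int}
    (h1 : 0 ≤ i) (h2 : i < (n : Int)) :
    0 ≤ rootB par i ∧ rootB par i ≤ i ∧
      par.getD (rootB par i).toNat 0 = rootB par i := by
  have := findB_root hI (par.length + 1) i h1 h2 (by rw [hI.1]; omega)
  exact this

lemma rootB_of_root {par : List Int} {r : Int} (h0 : 0 ≤ r)
    (hr : par.getD r.toNat 0 = r) : rootB par r = r := by
  rw [rootB, show findB par (par.length + 1) r =
    (if PySem.List.pyGetD par r 0 = r then r
     else findB par par.length (PySem.List.pyGetD par r 0)) from rfl,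
    pyGetD_toNat par h0, if_pos hr]

lemma rootB_step {n : Nat} {par : List Int} (hI : InvP n par) {i : Int}
    (h1 : 0 ≤ i) (h2 : i < (n : Int)) (hne : par.getD i.toNat 0 ≠ i) :
    rootB par i = rootB par (par.getD i.toNat 0) := by
  have hk : i.toNat < n := by omega
  obtain ⟨hp0, hpi⟩ := hI.2 i.toNat hk
  have hlt : par.getD i.toNat 0 < i := by
    rcases lt_or_eq_of_le (by omega : par.getD i.toNat 0 ≤ i) with h | h
    · exact h
    · exact absurd h hne
  rw [rootB, show findB par (par.length + 1) i =
    (if PySem.List.pyGetD par i 0 = i then i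
     else findB par par.length (PySem.List.pyGetD par i 0)) from rfl,
    pyGetD_toNat par h1, if_neg hne, rootB]
  exact findB_fuel hI par.length (par.length + 1) (par.getD i.toNat 0) hp0 (by omega)
    (by rw [hI.1]; omega) (by rw [hI.1]; omega)

lemma InvP_set {n : Nat} {par : List Int} (hI : InvP n par) {a b : Int}
    (ha0 : 0 ≤ a) (hb : b < (n : Int)) (hab : a < b) :
    InvP n (par.set b.toNat a) := by
  refine ⟨by rw [List.length_set, hI.1], ?_⟩
  intro k hk
  by_cases hkb : k = b.toNat
  · subst hkb
    rw [getD_set_self' par (by rw [hI.1]; omega) a]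
    constructor
    · exact ha0
    · have : (b.toNat : Int) = b := by omega
      omega
  · rw [getD_set_ne' par hkb a]
    exact hI.2 k hk

lemma rootB_set {n : Nat} {par : List Int} (hI : InvP n par) {a b : Int}
    (ha0 : 0 ≤ a) (han : a < (n : Int)) (hb0 : 0 ≤ b) (hbn : b < (n : Int))
    (hra : par.getD a.toNat 0 = a) (hrb : par.getD b.toNat 0 = b) (hab : a < b) :
    ∀ i : Int, 0 ≤ i → i < (n : Int) →
      rootB (par.set b.toNat a) i = if rootB par i = b then a else rootB par i := by
  have hI' : InvP n (par.set b.toNat a) := InvP_set hI ha0 hbn hab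
  have key : ∀ k : Nat, ∀ i : Int, 0 ≤ i → i < (n : Int) → i.toNat = k →
      rootB (par.set b.toNat a) i = if rootB par i = b then a else rootB par i := by
    intro k
    induction k using Nat.strong_induction_on with
    | _ k IH =>
      intro i h1 h2 hk
      by_cases hib : i = b
      · have hset : (par.set b.toNat a).getD i.toNat 0 = a := by
          rw [hib]; exact getD_set_self' par (by rw [hI.1]; omega) a
        have hne : (par.set b.toNat a).getD i.toNat 0 ≠ i := by rw [hset]; omega
        rw [rootB_step hI' h1 h2 hne, hset]
        have haa : (par.set b.toNat a).getD a.toNat 0 = a := by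
          rw [getD_set_ne' par (by omega) a]; exact hra
        have hrbi : rootB par i = b := by rw [hib]; exact rootB_of_root hb0 hrb
        rw [rootB_of_root ha0 haa, hrbi, if_pos rfl]
      · have hset : (par.set b.toNat a).getD i.toNat 0 = par.getD i.toNat 0 :=
          getD_set_ne' par (by omega) a
        by_cases heq : par.getD i.toNat 0 = i
        · rw [rootB_of_root h1 (hset.trans heq), rootB_of_root h1 heq, if_neg hib]
        · have hp0 : 0 ≤ par.getD i.toNat 0 := (hI.2 i.toNat (by omega)).1
          have hpi : par.getD i.toNat 0 < i := by
            have := (hI.2 i.toNat (by omega)).2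
            rcases lt_or_eq_of_le (by omega : par.getD i.toNat 0 ≤ i) with h | h
            · exact h
            · exact absurd h heq
          rw [rootB_step hI' h1 h2 (by rw [hset]; exact heq), hset,
            rootB_step hI h1 h2 heq]
          exact IH (par.getD i.toNat 0).toNat (by omega) _ hp0 (by omega) rfl
  intro i h1 h2
  exact key i.toNat i h1 h2 rfl

lemma unionB_spec {n : Nat} {par : List Int} (hI : InvP n par) {i j : Int}
    (hi0 : 0 ≤ i) (hin : i < (n : Int)) (hj0 : 0 ≤ j) (hjn : j < (n : Int)) :
    InvP n (unionB par i j) ∧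
    ∀ x : Int, 0 ≤ x → x < (n : Int) →
      rootB (unionB par i j) x =
        if rootB par x = rootB par i ∨ rootB par x = rootB par j then
          (if rootB par i < rootB par j then rootB par i else rootB par j)
        else rootB par x := by
  obtain ⟨ha0, hai, hra⟩ := rootB_spec hI hi0 hin
  obtain ⟨hb0, hbj, hrb⟩ := rootB_spec hI hj0 hjn
  set a := rootB par i with hdefa
  set b := rootB par j with hdefb
  by_cases hab : a = b
  · rw [unionB]
    simp only [← hdefa, ← hdefb, if_neg (by omega : ¬ a ≠ b)]
    refine ⟨hI, ?_⟩
    intro x hx0 hxn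
    split_ifs <;> omega
  · by_cases hlt : a < b
    · rw [unionB]
      simp only [← hdefa, ← hdefb, if_pos (by omega : a ≠ b), if_pos hlt]
      refine ⟨InvP_set hI ha0 (by omega) hlt, ?_⟩
      intro x hx0 hxn
      rw [rootB_set hI ha0 (by omega) hb0 (by omega) hra hrb hlt x hx0 hxn]
      split_ifs <;> omega
    · have hgt : b < a := by omega
      rw [unionB]
      simp only [← hdefa, ← hdefb, if_pos (by omega : a ≠ b), if_neg hlt]
      refine ⟨InvP_set hI hb0 (by omega) hgt, ?_⟩
      intro x hx0 hxn
      rw [rootB_set hI hb0 (by omega) ha0 (by omega) hrb hra hgt x hx0 hxn]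
      split_ifs <;> omega

-- the per-edge update of the characterising relation
def extRelI (S : Int → Int → Prop) : List (Int × Int) → Int → Int → Prop
  | [] => S
  | e :: rest =>
    extRelI (fun x y => S x y ∨ (S x e.1 ∧ S e.2 y) ∨ (S x e.2 ∧ S e.1 y)) rest

lemma dsu_fold {n : Nat} :
    ∀ (EL : List (Int × Int)) (par : List Int) (S : Int → Int → Prop),
      InvP n par →
      (∀ e ∈ EL, 0 ≤ e.1 ∧ e.1 < (n : Int) ∧ 0 ≤ e.2 ∧ e.2 < (n : Int)) →
      (∀ x y : Int, 0 ≤ x → x < (n : Int) → 0 ≤ y → y < (n : Int) →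
        (rootB par x = rootB par y ↔ S x y)) →
      InvP n (EL.foldl (fun par e => unionB par e.1 e.2) par) ∧
      (∀ x y : Int, 0 ≤ x → x < (n : Int) → 0 ≤ y → y < (n : Int) →
        (rootB (EL.foldl (fun par e => unionB par e.1 e.2) par) x =
           rootB (EL.foldl (fun par e => unionB par e.1 e.2) par) y ↔ extRelI S EL x y)) := by
  intro EL
  induction EL with
  | nil => intro par S hI _ hchar; exact ⟨hI, hchar⟩
  | cons e rest ih =>
    intro par S hI hEL hchar
    obtain ⟨he1, he2, he3, he4⟩ := hEL e List.mem_cons_self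
    obtain ⟨hI1, hroot1⟩ := unionB_spec hI he1 he2 he3 he4
    have hchar1 : ∀ x y : Int, 0 ≤ x → x < (n : Int) → 0 ≤ y → y < (n : Int) →
        (rootB (unionB par e.1 e.2) x = rootB (unionB par e.1 e.2) y ↔
          (S x y ∨ (S x e.1 ∧ S e.2 y) ∨ (S x e.2 ∧ S e.1 y))) := by
      intro x y hx0 hxn hy0 hyn
      rw [hroot1 x hx0 hxn, hroot1 y hy0 hyn]
      rw [← hchar x y hx0 hxn hy0 hyn, ← hchar x e.1 hx0 hxn he1 he2,
        ← hchar e.2 y he3 he4 hy0 hyn, ← hchar x e.2 hx0 hxn he3 he4,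
        ← hchar e.1 y he1 he2 hy0 hyn]
      split_ifs <;> omega
    rw [List.foldl_cons]
    exact ih (unionB par e.1 e.2) _ hI1 (fun e' he' => hEL e' (List.mem_cons_of_mem _ he')) hchar1

-- ---------- undirected connectivity over an edge list ----------
def CnI (E : List (Int × Int)) (x y : Int) : Prop :=
  Relation.ReflTransGen (fun a b => (a, b) ∈ E ∨ (b, a) ∈ E) x y

lemma CnI_congr {E1 E2 : List (Int × Int)} (h : ∀ e, e ∈ E1 ↔ e ∈ E2) {x y : Int} :
    CnI E1 x y → CnI E2 x y := by
  intro hc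
  induction hc with
  | refl => exact Relation.ReflTransGen.refl
  | tail hab hbc ih =>
    refine ih.tail ?_
    rcases hbc with h' | h'
    · exact Or.inl ((h _).mp h')
    · exact Or.inr ((h _).mp h')

lemma CnI_mono {e : Int × Int} {E : List (Int × Int)} {x y : Int} (h : CnI E x y) :
    CnI (e :: E) x y := by
  induction h with
  | refl => exact Relation.ReflTransGen.refl
  | tail hab hbc ih =>
    refine ih.tail ?_
    rcases hbc with h' | h'
    · exact Or.inl (List.mem_cons_of_mem _ h')
    · exact Or.inr (List.mem_cons_of_mem _ h')

lemma CnI_cons {e : Int × Int} {E : List (Int × Int)} {x y : Int} :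
    CnI (e :: E) x y ↔
      CnI E x y ∨ (CnI E x e.1 ∧ CnI E e.2 y) ∨ (CnI E x e.2 ∧ CnI E e.1 y) := by
  constructor
  · intro h
    induction h with
    | refl => exact Or.inl Relation.ReflTransGen.refl
    | tail hab hbc ih =>
      rename_i b c
      rcases hbc with hbc | hbc
      · rcases List.mem_cons.mp hbc with hbc | hbc
        · have hb : b = e.1 := (Prod.ext_iff.mp hbc).1
          have hc : c = e.2 := (Prod.ext_iff.mp hbc).2
          subst hb; subst hc
          rcases ih with h | ⟨h1, h2⟩ | ⟨h1, h2⟩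
          · exact Or.inr (Or.inl ⟨h, Relation.ReflTransGen.refl⟩)
          · exact Or.inr (Or.inl ⟨h1, Relation.ReflTransGen.refl⟩)
          · exact Or.inl h1
        · rcases ih with h | ⟨h1, h2⟩ | ⟨h1, h2⟩
          · exact Or.inl (h.tail (Or.inl hbc))
          · exact Or.inr (Or.inl ⟨h1, h2.tail (Or.inl hbc)⟩)
          · exact Or.inr (Or.inr ⟨h1, h2.tail (Or.inl hbc)⟩)
      · rcases List.mem_cons.mp hbc with hbc | hbc
        · have hc : c = e.1 := (Prod.ext_iff.mp hbc).1
          have hb : b = e.2 := (Prod.ext_iff.mp hbc).2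
          subst hb; subst hc
          rcases ih with h | ⟨h1, h2⟩ | ⟨h1, h2⟩
          · exact Or.inr (Or.inr ⟨h, Relation.ReflTransGen.refl⟩)
          · exact Or.inl h1
          · exact Or.inr (Or.inr ⟨h1, Relation.ReflTransGen.refl⟩)
        · rcases ih with h | ⟨h1, h2⟩ | ⟨h1, h2⟩
          · exact Or.inl (h.tail (Or.inr hbc))
          · exact Or.inr (Or.inl ⟨h1, h2.tail (Or.inr hbc)⟩)
          · exact Or.inr (Or.inr ⟨h1, h2.tail (Or.inr hbc)⟩)
  · rintro (h | ⟨h1, h2⟩ | ⟨h1, h2⟩)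
    · exact CnI_mono h
    · exact ((CnI_mono h1).tail (Or.inl List.mem_cons_self)).trans (CnI_mono h2)
    · exact ((CnI_mono h1).tail (Or.inr List.mem_cons_self)).trans (CnI_mono h2)

lemma extRelI_iff :
    ∀ (EL : List (Int × Int)) (S : Int → Int → Prop) (E : List (Int × Int)),
      (∀ x y, S x y ↔ CnI E x y) →
      ∀ x y, extRelI S EL x y ↔ CnI (EL ++ E) x y := by
  intro EL
  induction EL with
  | nil => intro S E hS x y; simpa using hS x y
  | cons e rest ih =>
    intro S E hS x y
    have hS1 : ∀ x y, (S x y ∨ (S x e.1 ∧ S e.2 y) ∨ (S x e.2 ∧ S e.1 y)) ↔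
        CnI (e :: E) x y := by
      intro x y
      rw [CnI_cons, hS, hS, hS, hS, hS]
    have := ih _ (e :: E) hS1 x y
    rw [show extRelI S (e :: rest) = extRelI
      (fun x y => S x y ∨ (S x e.1 ∧ S e.2 y) ∨ (S x e.2 ∧ S e.1 y)) rest from rfl]
    rw [this]
    constructor
    · exact fun h => CnI_congr (by intro e'; simp; tauto) h
    · exact fun h => CnI_congr (by intro e'; simp; tauto) h

-- ---------- the edge list B's first double loop processes ----------
def edgeCells (mmap : List String) (rows cols : Int) : List ((Int × Int) × (Int × Int)) :=
  (cellsL rows cols).flatMap (fun p =>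
    if cellC mmap p.1 p.2 ≠ some '#' then
      ([(p.1 + 1, p.2), (p.1, p.2 + 1)].filter
        (fun q => decide (q.1 < rows ∧ q.2 < cols ∧ cellC mmap q.1 q.2 ≠ some '#'))).map
        (fun q => (p, q))
    else [])

lemma edgeStepB_eq (mmap : List String) (rows cols : Int) (par : List Int) (r c : Int) :
    edgeStepB mmap rows cols par r c =
      ((if cellC mmap r c ≠ some '#' then
          ([((r : Int) + 1, c), (r, c + 1)].filter
            (fun q => decide (q.1 < rows ∧ q.2 < cols ∧ cellC mmap q.1 q.2 ≠ some '#'))).map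
            (fun q => (((r, c) : Int × Int), q))
        else []).foldl (fun par e => unionB par (encC cols e.1) (encC cols e.2)) par) := by
  by_cases h : cellC mmap r c ≠ some '#'
  · rw [edgeStepB, if_pos h, if_pos h, List.foldl_map, List.foldl_filter]
    simp only [decide_eq_true_eq, encC]
  · rw [edgeStepB, if_neg h, if_neg h, List.foldl_nil]

lemma edge_fold_eq (mmap : List String) (rows cols : Int) (par0 : List Int) :
    (PySem.List.pyRange 0 rows 1).foldl (fun par r =>
      (PySem.List.pyRange 0 cols 1).foldl (fun par c =>
        edgeStepB mmap rows cols par r c) par) par0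
    = ((edgeCells mmap rows cols).map (fun e => (encC cols e.1, encC cols e.2))).foldl
        (fun par e => unionB par e.1 e.2) par0 := by
  rw [nested_eq_cells rows cols (fun par r c => edgeStepB mmap rows cols par r c) par0,
    List.foldl_map, edgeCells, List.foldl_flatMap]
  congr 1
  funext par p
  exact edgeStepB_eq mmap rows cols par p.1 p.2

lemma mem_edgeCells (mmap : List String) (rows cols : Int) (e : (Int × Int) × (Int × Int)) :
    e ∈ edgeCells mmap rows cols ↔
      opn mmap rows cols e.1 ∧ opn mmap rows cols e.2 ∧
        (e.2 = (e.1.1 + 1, e.1.2) ∨ e.2 = (e.1.1, e.1.2 + 1)) := by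
  simp only [edgeCells, List.mem_flatMap, mem_cellsL]
  constructor
  · rintro ⟨p, hp, hmem⟩
    by_cases h : cellC mmap p.1 p.2 ≠ some '#'
    · rw [if_pos h] at hmem
      simp only [List.mem_map, List.mem_filter, List.mem_cons, List.not_mem_nil, or_false,
        decide_eq_true_eq] at hmem
      obtain ⟨q, ⟨hq1, hq2, hq3, hq4⟩, rfl⟩ := hmem
      have hqin : inB rows cols q := by
        rcases hq1 with rfl | rfl
        · exact ⟨by omega, hq2, by omega, hq3⟩
        · exact ⟨by omega, hq2, by omega, hq3⟩
      refine ⟨⟨hp, h⟩, ⟨hqin, hq4⟩, ?_⟩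
      rcases hq1 with rfl | rfl
      · exact Or.inl rfl
      · exact Or.inr rfl
    · rw [if_neg h] at hmem
      simp at hmem
  · rintro ⟨⟨hp, hp2⟩, ⟨hq, hq2⟩, hd⟩
    refine ⟨e.1, hp, ?_⟩
    rw [if_pos hp2]
    simp only [List.mem_map, List.mem_filter, List.mem_cons, List.not_mem_nil, or_false,
      decide_eq_true_eq]
    refine ⟨e.2, ⟨?_, hq.2.1, hq.2.2.2, hq2⟩, rfl⟩
    rcases hd with h | h
    · exact Or.inl h
    · exact Or.inr h

-- ---------- the initial parent array ----------
lemma parent0_getD (b : Int) (k : Nat) (hk : k < b.toNat) :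
    (PySem.List.pyRange 0 b 1).getD k 0 = (k : Int) := by
  rw [PySem.List.pyRange_one, sub_zero]
  rw [List.getD_eq_getElem?_getD, List.getElem?_map, List.getElem?_range hk]
  simp

lemma parent0_length (b : Int) : (PySem.List.pyRange 0 b 1).length = b.toNat := by
  rw [PySem.List.pyRange_one]
  simp

lemma InvP_parent0 (b : Int) : InvP b.toNat (PySem.List.pyRange 0 b 1) :=
  ⟨parent0_length b, fun k hk => by rw [parent0_getD b k hk]; omega⟩

lemma rootB_parent0 (b : Int) {x : Int} (h1 : 0 ≤ x) (h2 : x < (b.toNat : Int)) :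
    rootB (PySem.List.pyRange 0 b 1) x = x :=
  rootB_of_root h1 (by rw [parent0_getD b x.toNat (by omega)]; omega)

lemma CnI_nil {x y : Int} : CnI [] x y ↔ x = y := by
  constructor
  · intro h
    induction h with
    | refl => rfl
    | tail hab hbc ih => simp at hbc
  · rintro rfl; exact Relation.ReflTransGen.refl

-- ---------- connectivity over edgeCells vs A's reachability ----------
lemma Rch_to_CnI (mmap : List String) (rows cols : Int) {p q : Int × Int}
    (hp : opn mmap rows cols p) (h : Rch mmap rows cols p q) :
    CnI ((edgeCells mmap rows cols).map (fun e => (encC cols e.1, encC cols e.2)))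
      (encC cols p) (encC cols q) := by
  induction h with
  | refl => exact Relation.ReflTransGen.refl
  | tail hab hbc ih =>
    rename_i b c
    have hb : opn mmap rows cols b := Rch_opn mmap rows cols hp hab
    refine ih.tail ?_
    obtain ⟨hcand, hcop⟩ := hbc
    simp only [cands, List.mem_cons, List.not_mem_nil, or_false] at hcand
    rcases hcand with rfl | rfl | rfl | rfl
    · -- c = (b.1 - 1, b.2) : reversed edge (c, b)
      refine Or.inr (List.mem_map.mpr ⟨((b.1 - 1, b.2), b), ?_, rfl⟩)
      rw [mem_edgeCells]
      exact ⟨hcop, hb, Or.inl (by simp)⟩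
    · refine Or.inl (List.mem_map.mpr ⟨(b, (b.1 + 1, b.2)), ?_, rfl⟩)
      rw [mem_edgeCells]
      exact ⟨hb, hcop, Or.inl rfl⟩
    · refine Or.inr (List.mem_map.mpr ⟨((b.1, b.2 - 1), b), ?_, rfl⟩)
      rw [mem_edgeCells]
      exact ⟨hcop, hb, Or.inr (by simp)⟩
    · refine Or.inl (List.mem_map.mpr ⟨(b, (b.1, b.2 + 1)), ?_, rfl⟩)
      rw [mem_edgeCells]
      exact ⟨hb, hcop, Or.inr rfl⟩

lemma adj_of_edge (mmap : List String) (rows cols : Int) {u w : Int × Int}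
    (h : (u, w) ∈ edgeCells mmap rows cols) :
    adjR mmap rows cols u w ∧ adjR mmap rows cols w u := by
  rw [mem_edgeCells] at h
  obtain ⟨hu, hw, hd⟩ := h
  have hcand : w ∈ cands u.1 u.2 := by
    simp only [cands, List.mem_cons, List.not_mem_nil, or_false]
    rcases hd with h | h
    · refine Or.inr (Or.inl ?_)
      simp only at h
      rw [h]
    · refine Or.inr (Or.inr (Or.inr ?_))
      simp only at h
      rw [h]
  exact ⟨⟨hcand, hw⟩, ⟨mem_cands_symm hcand, hu⟩⟩

lemma CnI_to_Rch_aux (mmap : List String) (rows cols : Int) {x y : Int}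
    (h : CnI ((edgeCells mmap rows cols).map (fun e => (encC cols e.1, encC cols e.2))) x y) :
    x = y ∨ ∃ u w, opn mmap rows cols u ∧ opn mmap rows cols w ∧
      encC cols u = x ∧ encC cols w = y ∧ Rch mmap rows cols u w := by
  induction h with
  | refl => exact Or.inl rfl
  | tail hab hbc ih =>
    rename_i b c
    -- the step edge decodes as an adjacent open pair (u', w') with enc u' = b, enc w' = c
    have hdec : ∃ u' w', opn mmap rows cols u' ∧ opn mmap rows cols w' ∧
        encC cols u' = b ∧ encC cols w' = c ∧
        adjR mmap rows cols u' w' ∧ adjR mmap rows cols w' u' := by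
      rcases hbc with h' | h'
      · obtain ⟨e, he, heq⟩ := List.mem_map.mp h'
        obtain ⟨hadj1, hadj2⟩ := adj_of_edge mmap rows cols
          (show (e.1, e.2) ∈ edgeCells mmap rows cols from he)
        obtain ⟨hu, hw, -⟩ := (mem_edgeCells mmap rows cols e).mp he
        exact ⟨e.1, e.2, hu, hw, (Prod.ext_iff.mp heq).1, (Prod.ext_iff.mp heq).2, hadj1, hadj2⟩
      · obtain ⟨e, he, heq⟩ := List.mem_map.mp h'
        obtain ⟨hadj1, hadj2⟩ := adj_of_edge mmap rows cols
          (show (e.1, e.2) ∈ edgeCells mmap rows cols from he)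
        obtain ⟨hu, hw, -⟩ := (mem_edgeCells mmap rows cols e).mp he
        exact ⟨e.2, e.1, hw, hu, (Prod.ext_iff.mp heq).2, (Prod.ext_iff.mp heq).1, hadj2, hadj1⟩
    obtain ⟨u', w', hu', hw', he1, he2, hadj, -⟩ := hdec
    rcases ih with rfl | ⟨u, w, hu, hw, hex, hey, hr⟩
    · exact Or.inr ⟨u', w', hu', hw', he1, he2, Relation.ReflTransGen.single hadj⟩
    · have : w = u' := encC_inj rows cols hw.1 hu'.1 (by rw [hey, he1])
      subst this
      exact Or.inr ⟨u, w', hu, hw', hex, he2, hr.tail hadj⟩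

-- ---------- the final parent array characterises A's reachability ----------
lemma root_iff_Rch (mmap : List String) (rows cols : Int) (hr : 0 ≤ rows) (hc : 0 ≤ cols)
    {p q : Int × Int} (hp : opn mmap rows cols p) (hq : opn mmap rows cols q) :
    (rootB (((edgeCells mmap rows cols).map (fun e => (encC cols e.1, encC cols e.2))).foldl
        (fun par e => unionB par e.1 e.2) (PySem.List.pyRange 0 (rows * cols) 1))
        (encC cols p) =
     rootB (((edgeCells mmap rows cols).map (fun e => (encC cols e.1, encC cols e.2))).foldl
        (fun par e => unionB par e.1 e.2) (PySem.List.pyRange 0 (rows * cols) 1))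
        (encC cols q)) ↔ Rch mmap rows cols p q := by
  have hrc : 0 ≤ rows * cols := mul_nonneg hr hc
  have hcast : (((rows * cols).toNat : Nat) : Int) = rows * cols := by omega
  have hEL : ∀ e ∈ (edgeCells mmap rows cols).map
      (fun e => (encC cols e.1, encC cols e.2)),
      0 ≤ e.1 ∧ e.1 < (((rows * cols).toNat : Nat) : Int) ∧
      0 ≤ e.2 ∧ e.2 < (((rows * cols).toNat : Nat) : Int) := by
    intro e he
    obtain ⟨e', he', rfl⟩ := List.mem_map.mp he
    obtain ⟨h1, h2, -⟩ := (mem_edgeCells mmap rows cols e').mp he'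
    obtain ⟨a1, a2⟩ := encC_bounds rows cols h1.1
    obtain ⟨b1, b2⟩ := encC_bounds rows cols h2.1
    rw [hcast]
    exact ⟨a1, a2, b1, b2⟩
  have hbase : ∀ x y : Int, 0 ≤ x → x < (((rows * cols).toNat : Nat) : Int) →
      0 ≤ y → y < (((rows * cols).toNat : Nat) : Int) →
      (rootB (PySem.List.pyRange 0 (rows * cols) 1) x =
        rootB (PySem.List.pyRange 0 (rows * cols) 1) y ↔ x = y) := by
    intro x y hx0 hxn hy0 hyn
    rw [rootB_parent0 (rows * cols) hx0 hxn, rootB_parent0 (rows * cols) hy0 hyn]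
  obtain ⟨-, hchar⟩ := dsu_fold (n := (rows * cols).toNat)
    ((edgeCells mmap rows cols).map (fun e => (encC cols e.1, encC cols e.2)))
    (PySem.List.pyRange 0 (rows * cols) 1) Eq (InvP_parent0 (rows * cols)) hEL hbase
  obtain ⟨hp1, hp2⟩ := encC_bounds rows cols hp.1
  obtain ⟨hq1, hq2⟩ := encC_bounds rows cols hq.1
  rw [hchar (encC cols p) (encC cols q) hp1 (by omega) hq1 (by omega)]
  rw [extRelI_iff _ Eq [] (fun x y => CnI_nil.symm) (encC cols p) (encC cols q),
    List.append_nil]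
  constructor
  · intro h
    rcases CnI_to_Rch_aux mmap rows cols h with h | ⟨u, w, hu, hw, heu, hew, hr'⟩
    · rw [encC_inj rows cols hp.1 hq.1 h]
      exact Relation.ReflTransGen.refl
    · rw [← encC_inj rows cols hu.1 hp.1 heu, ← encC_inj rows cols hw.1 hq.1 hew]
      exact hr'
  · exact Rch_to_CnI mmap rows cols hp

-- ---------- the scan order shared by A's outer loop and B's tally loop ----------
def svB (mmap : List String) (p : Int × Int) : Bool :=
  (cellC mmap p.1 p.2 == some 'o') || (cellC mmap p.1 p.2 == some 'v')

-- first (in scan order) 'o'/'v' cell of each component, given a root function rt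
def firstsAux (sv : Int × Int → Bool) (rt : Int × Int → Int) :
    List (Int × Int) → List (Int × Int) → List (Int × Int)
  | [], acc => acc
  | t :: rest, acc =>
      firstsAux sv rt rest
        (if sv t && acc.all (fun f => rt f != rt t) then acc ++ [t] else acc)

-- number of scanned cells of f's component with the wanted kind ('o' if wantO)
def cntB2 (sv isO : (Int × Int) → Bool) (rt : (Int × Int) → Int) (wantO : Bool)
    (f : Int × Int) (Q : List (Int × Int)) : Int :=
  ((Q.filter (fun q => (rt q == rt f) && sv q && (isO q == wantO))).length : Int)

lemma firstsAux_mem (sv : Int × Int → Bool) (rt : Int × Int → Int) :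
    ∀ (Q acc : List (Int × Int)) (f : Int × Int), f ∈ firstsAux sv rt Q acc →
      f ∈ acc ∨ (f ∈ Q ∧ sv f = true ∧ ∀ f' ∈ acc, rt f' ≠ rt f) := by
  intro Q
  induction Q with
  | nil => intro acc f hf; exact Or.inl hf
  | cons t rest ih =>
    intro acc f hf
    rw [firstsAux] at hf
    by_cases hg : (sv t && acc.all (fun f => rt f != rt t)) = true
    · rw [if_pos hg] at hf
      rcases ih _ f hf with hf | ⟨h1, h2, h3⟩
      · rcases List.mem_append.mp hf with hf | hf
        · exact Or.inl hf
        · obtain ⟨hsv, hall⟩ := Bool.and_eq_true_iff.mp hg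
          simp only [List.mem_singleton] at hf
          subst hf
          refine Or.inr ⟨List.mem_cons_self, hsv, ?_⟩
          intro f' hf'
          have := List.all_eq_true.mp hall f' hf'
          simpa using this
      · exact Or.inr ⟨List.mem_cons_of_mem _ h1, h2,
          fun f' hf' => h3 f' (List.mem_append_left _ hf')⟩
    · rw [if_neg hg] at hf
      rcases ih _ f hf with hf | ⟨h1, h2, h3⟩
      · exact Or.inl hf
      · exact Or.inr ⟨List.mem_cons_of_mem _ h1, h2, h3⟩

lemma cntB2_cons (sv isO : (Int × Int) → Bool) (rt : (Int × Int) → Int) (w : Bool)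
    (f t : Int × Int) (rest : List (Int × Int)) :
    cntB2 sv isO rt w f (t :: rest) =
      (if (rt t == rt f) && sv t && (isO t == w) then 1 else 0) + cntB2 sv isO rt w f rest := by
  rw [cntB2, cntB2, List.filter_cons]
  split <;> simp <;> ring

-- B's tally loop, abstracted over the root function
lemma tallyLoop (sv isO : (Int × Int) → Bool) (rt : (Int × Int) → Int) :
    ∀ (Q acc : List (Int × Int)) (g : (Int × Int) → Int × Int)
      (d : PySem.Dict Int (Int × Int)),
      (acc.map rt).Nodup →
      d.items = acc.map (fun f => (rt f, g f)) →
      (Q.foldl (fun d p =>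
          if sv p then
            d.insert (rt p)
              (if isO p then ((d.getD (rt p) (0, 0)).1 + 1, (d.getD (rt p) (0, 0)).2)
               else ((d.getD (rt p) (0, 0)).1, (d.getD (rt p) (0, 0)).2 + 1))
          else d) d).items =
        (firstsAux sv rt Q acc).map (fun f =>
          (rt f, ((if f ∈ acc then (g f).1 else 0) + cntB2 sv isO rt true f Q,
                  (if f ∈ acc then (g f).2 else 0) + cntB2 sv isO rt false f Q))) := by
  intro Q
  induction Q with
  | nil =>
    intro acc g d hnodup hitems
    rw [List.foldl_nil, firstsAux, hitems]
    apply List.map_congr_left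
    intro f hf
    simp [hf, cntB2]
  | cons t rest ih =>
    intro acc g d hnodup hitems
    have hkeys : d.keys = acc.map rt := by
      show d.items.map (·.1) = _
      rw [hitems, List.map_map]
      exact List.map_congr_left (fun f _ => rfl)
    rw [List.foldl_cons]
    by_cases hsv : sv t = true
    · by_cases hall : (acc.all (fun f => rt f != rt t)) = true
      · -- a fresh component root: the insert appends
        have ht_not_acc : t ∉ acc := fun h => by
          have := List.all_eq_true.mp hall t h; simp at this
        have hfresh : rt t ∉ acc.map rt := by
          intro h
          obtain ⟨f', hf', he⟩ := List.mem_map.mp h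
          exact absurd he (by simpa using List.all_eq_true.mp hall f' hf')
        have hcont : d.contains (rt t) = false := by
          cases hcc : d.contains (rt t)
          · rfl
          · have hk := (PySem.Dict.contains_iff_mem_keys d (rt t)).mp hcc
            rw [hkeys] at hk
            exact absurd hk hfresh
        have hgetD : d.getD (rt t) (0, 0) = ((0 : Int), (0 : Int)) :=
          PySem.Dict.getD_of_not_contains d _ hcont
        rw [if_pos hsv, hgetD]
        have hitems' : (d.insert (rt t)
            (if isO t then ((0 : Int) + 1, (0 : Int)) else ((0 : Int), (0 : Int) + 1))).items =
            (acc ++ [t]).map (fun f => (rt f,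
              (fun f => if f = t then
                (if isO t then ((0 : Int) + 1, (0 : Int)) else ((0 : Int), (0 : Int) + 1))
                else g f) f)) := by
          rw [PySem.Dict.items_insert_of_not_contains d _ hcont, hitems, List.map_append]
          congr 1
          · apply List.map_congr_left
            intro f hf
            have : f ≠ t := fun h => ht_not_acc (h ▸ hf)
            simp [this]
          · simp
        have hnodup' : ((acc ++ [t]).map rt).Nodup := by
          rw [List.map_append]
          simp only [List.map_cons, List.map_nil]
          refine List.Nodup.append hnodup (List.nodup_singleton _) ?_
          intro a ha hb
          rw [List.mem_singleton] at hb
          exact hfresh (hb ▸ ha)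
        have hcond : (sv t && acc.all fun f => rt f != rt t) = true := by
          simp [hsv, hall]
        rw [ih (acc ++ [t]) _ _ hnodup' hitems']
        rw [firstsAux, if_pos hcond]
        apply List.map_congr_left
        intro f hf
        have hmem := firstsAux_mem sv rt rest (acc ++ [t]) f hf
        rw [cntB2_cons, cntB2_cons]
        by_cases hft : f = t
        · have hft2 : t = f := hft.symm
          subst hft2
          have hin : t ∈ acc ++ [t] := List.mem_append_right _ (List.mem_singleton.mpr rfl)
          rw [if_pos hin, if_neg ht_not_acc]
          simp only [if_pos rfl]
          cases hO : isO t <;> simp [hsv, hO, ht_not_acc] <;> try ring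
        · have hrtne : rt t ≠ rt f := by
            rcases hmem with hmem | ⟨-, -, hforall⟩
            · rcases List.mem_append.mp hmem with hmem | hmem
              · intro h
                have h2 := List.all_eq_true.mp hall f hmem
                simp at h2
                exact h2 h.symm
              · exact absurd (List.mem_singleton.mp hmem) hft
            · exact hforall t (List.mem_append_right _ (List.mem_singleton.mpr rfl))
          have hinacc : (f ∈ acc ++ [t]) ↔ f ∈ acc := by
            simp [List.mem_append, hft]
          have htterm : ((rt t == rt f) && sv t && (isO t == true)) = false ∧
              ((rt t == rt f) && sv t && (isO t == false)) = false := by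
            constructor <;> simp [hrtne]
          rw [htterm.1, htterm.2]
          by_cases hfa : f ∈ acc <;> simp [hft, hfa]
      · -- the component root is already a key: the insert updates in place
        have hall' : ∃ f0 ∈ acc, ¬ ((rt f0 != rt t) = true) := by
          simpa [List.all_eq_true, not_forall] using hall
        obtain ⟨f0, hf0, hne0⟩ := hall'
        have hrt0 : rt f0 = rt t := by simpa using hne0
        have hcont : d.contains (rt t) = true := by
          rw [PySem.Dict.contains_iff_mem_keys d (rt t), hkeys]
          exact List.mem_map.mpr ⟨f0, hf0, hrt0⟩
        have hknd : d.keys.Nodup := by rw [hkeys]; exact hnodup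
        have hgetD : d.getD (rt t) (0, 0) = g f0 :=
          PySem.Dict.getD_of_mem_items d
            (by rw [hitems]; exact List.mem_map.mpr ⟨f0, hf0, by rw [hrt0]⟩) hknd (0, 0)
        rw [if_pos hsv, hgetD]
        have hitems' : (d.insert (rt t)
            (if isO t then ((g f0).1 + 1, (g f0).2) else ((g f0).1, (g f0).2 + 1))).items =
            acc.map (fun f => (rt f,
              (fun f => if rt f = rt t then
                (if isO t then ((g f0).1 + 1, (g f0).2) else ((g f0).1, (g f0).2 + 1))
                else g f) f)) := by
          rw [PySem.Dict.items_insert_of_contains d _ hcont, hitems, List.map_map]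
          apply List.map_congr_left
          intro f hf
          by_cases hftr : rt f = rt t
          · simp [hftr]
          · simp only [Function.comp_apply]
            have : (rt f == rt t) = false := by simp [hftr]
            simp [this, hftr]
        have hcond : ¬ ((sv t && acc.all fun f => rt f != rt t) = true) := by
          simp only [Bool.and_eq_true]
          rintro ⟨-, h⟩
          exact hall h
        rw [ih acc _ _ hnodup hitems']
        rw [firstsAux, if_neg hcond]
        apply List.map_congr_left
        intro f hf
        have hmem := firstsAux_mem sv rt rest acc f hf
        rw [cntB2_cons, cntB2_cons]
        by_cases hfa : f ∈ acc
        · by_cases hftr : rt f = rt t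
          · have hff0 : f = f0 :=
              List.inj_on_of_nodup_map hnodup hfa hf0 (by rw [hftr, hrt0])
            subst hff0
            rw [if_pos hfa, if_pos hfa]
            simp only [if_pos hftr]
            have hbeq : (rt t == rt f) = true := by simp [hftr.symm]
            cases hO : isO t <;>
              simp [hbeq, hsv, hO, hfa, add_comm, add_left_comm]
          · have hbeq : (rt t == rt f) = false := by
              simp; exact fun h => hftr h.symm
            rw [if_pos hfa, if_pos hfa]
            simp [hbeq, hftr, hfa]
        · have hforall : ∀ f' ∈ acc, rt f' ≠ rt f := by
            rcases hmem with hmem | ⟨-, -, h3⟩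
            · exact absurd hmem hfa
            · exact h3
          have hbeq : (rt t == rt f) = false := by
            simp
            intro h
            exact hforall f0 hf0 (by rw [hrt0, h])
          rw [if_neg hfa, if_neg hfa]
          simp [hbeq, hfa]
    · -- not an 'o'/'v' cell: nothing changes
      have hsv' : sv t = false := by simpa using hsv
      rw [if_neg (by simp [hsv'])]
      have hcond : ¬ ((sv t && acc.all fun f => rt f != rt t) = true) := by
        simp [hsv']
      rw [ih acc g d hnodup hitems]
      rw [firstsAux, if_neg hcond]
      apply List.map_congr_left
      intro f hf
      rw [cntB2_cons, cntB2_cons]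
      simp [hsv']

-- ---------- per-component counts and A's per-component contribution ----------
noncomputable def compCnt (mmap : List String) (rows cols : Int) (c : Char)
    (f : Int × Int) : Int :=
  ((@Finset.filter _ (fun p => Rch mmap rows cols f p ∧ cellC mmap p.1 p.2 = some c)
    (Classical.decPred _) (grid rows cols)).card : Int)

noncomputable def contrib (mmap : List String) (rows cols : Int)
    (acc : Int × Int) (f : Int × Int) : Int × Int :=
  if compCnt mmap rows cols 'o' f > compCnt mmap rows cols 'v' f then
    (acc.1 + compCnt mmap rows cols 'o' f, acc.2)
  else (acc.1, acc.2 + compCnt mmap rows cols 'v' f)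

lemma svB_iff (mmap : List String) (p : Int × Int) :
    svB mmap p = true ↔ (cellC mmap p.1 p.2 = some 'o' ∨ cellC mmap p.1 p.2 = some 'v') := by
  simp [svB]

lemma sv_opn (mmap : List String) (rows cols : Int) {p : Int × Int} (hin : inB rows cols p)
    (hsv : svB mmap p = true) : opn mmap rows cols p := by
  refine ⟨hin, ?_⟩
  rcases (svB_iff mmap p).mp hsv with h | h <;> rw [h] <;> decide

-- ---------- A's outer loop, characterised over the scan firsts ----------
lemma A_loop (mmap : List String) (rows cols : Int) (hr : 0 ≤ rows) (hc : 0 ≤ cols)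
    (rt : (Int × Int) → Int)
    (hR : ∀ p q, opn mmap rows cols p → opn mmap rows cols q →
      (rt p = rt q ↔ Rch mmap rows cols p q)) :
    ∀ (Q acc : List (Int × Int)) (v : List (List Int)) (sh wo : Int),
      (∀ p ∈ Q, inB rows cols p) →
      wfM rows cols v →
      (∀ f ∈ acc, inB rows cols f ∧ svB mmap f = true) →
      (∀ p, inB rows cols p → (visM v p ↔ ∃ f ∈ acc, Rch mmap rows cols f p)) →
      (sh, wo) = acc.foldl (contrib mmap rows cols) (0, 0) →
      ∃ v', Q.foldl (fun st p => outStepA mmap rows cols st p.1 p.2) (v, sh, wo) =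
        (v', (firstsAux (svB mmap) rt Q acc).foldl (contrib mmap rows cols) (0, 0)) := by
  intro Q
  induction Q with
  | nil =>
    intro acc v sh wo hQ hwf hacc hchar hsw
    exact ⟨v, by rw [List.foldl_nil, firstsAux, ← hsw]⟩
  | cons t rest ih =>
    intro acc v sh wo hQ hwf hacc hchar hsw
    have htin : inB rows cols t := hQ t List.mem_cons_self
    have hQ' : ∀ p ∈ rest, inB rows cols p := fun p hp => hQ p (List.mem_cons_of_mem _ hp)
    rw [List.foldl_cons]
    by_cases hvis : getV v t.1 t.2 = 0
    · by_cases hsvt : cellC mmap t.1 t.2 = some 'o' ∨ cellC mmap t.1 t.2 = some 'v'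
      · -- a fresh component: A explores it with its BFS
        have hsvB : svB mmap t = true := (svB_iff mmap t).mpr hsvt
        have hto : opn mmap rows cols t := sv_opn mmap rows cols htin hsvB
        have hnvt : ¬ visM v t := by
          have := (getV_zero_iff rows cols v hwf htin)
          exact this.mp hvis
        have hnoacc : ∀ f ∈ acc, ¬ Rch mmap rows cols f t := by
          intro f hf hryes
          exact hnvt ((hchar t htin).mpr ⟨f, hf, hryes⟩)
        obtain ⟨v₁, heq, hwf₁, hch₁⟩ :=
          bfsA_correct mmap rows cols t v hto (5 * (rows * cols).toNat + 1)
            v [t] 0 0 hwf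
            (by
              intro p hp
              rw [List.mem_singleton] at hp
              subst hp
              exact ⟨hto, hnvt, Relation.ReflTransGen.refl⟩)
            (List.nodup_singleton _)
            (fun p hp hv => Or.inl hv)
            (fun p hp hv => hv)
            (by
              intro p hp hv r hadj
              obtain ⟨f, hf, hrf⟩ := (hchar p hp).mp hv
              exact Or.inl ((hchar r hadj.2.1).mpr ⟨f, hf, hrf.tail hadj⟩))
            (Or.inl (List.mem_singleton.mpr rfl))
            (cntA_refl mmap rows cols v 'o').symm
            (cntA_refl mmap rows cols v 'v').symm
            (by
              have := uCntA_le rows cols hr hc v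
              simp only [List.length_singleton]
              omega)
        have hdisj : ∀ p, inB rows cols p → Rch mmap rows cols t p → ¬ visM v p := by
          intro p hp hrt hv
          obtain ⟨f, hf, hrf⟩ := (hchar p hp).mp hv
          have hfo : opn mmap rows cols f :=
            sv_opn mmap rows cols (hacc f hf).1 (hacc f hf).2
          exact hnoacc f hf (hrf.trans (Rch_symm mmap rows cols hto hrt))
        have hcnt : ∀ c : Char, cntA mmap rows cols v v₁ c = compCnt mmap rows cols c t := by
          intro c
          rw [cntA, compCnt]
          congr 1
          refine congrArg Finset.card ?_
          refine @Finset.filter_congr _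
            (fun p => visM v₁ p ∧ ¬ visM v p ∧ cellC mmap p.1 p.2 = some c)
            (fun p => Rch mmap rows cols t p ∧ cellC mmap p.1 p.2 = some c)
            _ (Classical.decPred _) (grid rows cols) ?_
          intro p hp
          have hpin : inB rows cols p := (mem_grid rows cols p).mp hp
          constructor
          · rintro ⟨h1, h2, h3⟩
            exact ⟨((hch₁ p hpin).mp h1).resolve_left h2, h3⟩
          · rintro ⟨h1, h3⟩
            exact ⟨(hch₁ p hpin).mpr (Or.inr h1), hdisj p hpin h1, h3⟩
        have hguard : (svB mmap t && acc.all fun f => rt f != rt t) = true := by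
          rw [hsvB, Bool.true_and, List.all_eq_true]
          intro f hf
          have hfo : opn mmap rows cols f :=
            sv_opn mmap rows cols (hacc f hf).1 (hacc f hf).2
          simp only [bne_iff_ne, ne_eq]
          intro hrteq
          exact hnoacc f hf ((hR f t hfo hto).mp hrteq)
        have hstep : outStepA mmap rows cols (v, sh, wo) t.1 t.2 =
            (v₁, contrib mmap rows cols (sh, wo) t) := by
          rw [outStepA]
          simp only
          rw [if_pos hvis, if_pos hsvt]
          have : (t.1, t.2) = t := rfl
          rw [this, heq, hcnt 'o', hcnt 'v', contrib]
          by_cases hcmp : compCnt mmap rows cols 'o' t > compCnt mmap rows cols 'v' t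
          · rw [if_pos hcmp, if_pos hcmp]
          · rw [if_neg hcmp, if_neg hcmp]
        rw [hstep]
        have hacc' : ∀ f ∈ acc ++ [t], inB rows cols f ∧ svB mmap f = true := by
          intro f hf
          rcases List.mem_append.mp hf with hf | hf
          · exact hacc f hf
          · rw [List.mem_singleton] at hf
            subst hf
            exact ⟨htin, hsvB⟩
        have hchar' : ∀ p, inB rows cols p →
            (visM v₁ p ↔ ∃ f ∈ acc ++ [t], Rch mmap rows cols f p) := by
          intro p hp
          rw [hch₁ p hp, hchar p hp]
          constructor
          · rintro (⟨f, hf, hrf⟩ | h)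
            · exact ⟨f, List.mem_append_left _ hf, hrf⟩
            · exact ⟨t, List.mem_append_right _ (List.mem_singleton.mpr rfl), h⟩
          · rintro ⟨f, hf, hrf⟩
            rcases List.mem_append.mp hf with hf | hf
            · exact Or.inl ⟨f, hf, hrf⟩
            · rw [List.mem_singleton] at hf
              subst hf
              exact Or.inr hrf
        have hsw' : contrib mmap rows cols (sh, wo) t =
            (acc ++ [t]).foldl (contrib mmap rows cols) (0, 0) := by
          rw [List.foldl_append, List.foldl_cons, List.foldl_nil, ← hsw]
        obtain ⟨v', hv'⟩ := ih (acc ++ [t]) v₁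
          (contrib mmap rows cols (sh, wo) t).1 (contrib mmap rows cols (sh, wo) t).2
          hQ' hwf₁ hacc' hchar' (by rw [← hsw'])
        refine ⟨v', ?_⟩
        rw [firstsAux, if_pos hguard, ← hv']
      · -- not an 'o'/'v' cell: A skips it
        have hsvB : svB mmap t = false := by
          cases h : svB mmap t
          · rfl
          · exact absurd ((svB_iff mmap t).mp h) hsvt
        have hstep : outStepA mmap rows cols (v, sh, wo) t.1 t.2 = (v, sh, wo) := by
          rw [outStepA]
          simp only
          rw [if_pos hvis, if_neg hsvt]
        rw [hstep, firstsAux, if_neg (by simp [hsvB])]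
        exact ih acc v sh wo hQ' hwf hacc hchar hsw
    · -- already visited: A skips it, and t's component root is already in acc
      have hstep : outStepA mmap rows cols (v, sh, wo) t.1 t.2 = (v, sh, wo) := by
        rw [outStepA]
        simp only
        rw [if_neg hvis]
      have hvist : visM v t := by
        have := (getV_zero_iff rows cols v hwf htin)
        by_cases h : visM v t
        · exact h
        · exact absurd (this.mpr h) hvis
      have hguard : ¬ ((svB mmap t && acc.all fun f => rt f != rt t) = true) := by
        rw [Bool.and_eq_true]
        rintro ⟨hsvB, hall⟩
        obtain ⟨f, hf, hrf⟩ := (hchar t htin).mp hvist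
        have hfo : opn mmap rows cols f :=
          sv_opn mmap rows cols (hacc f hf).1 (hacc f hf).2
        have hto : opn mmap rows cols t := sv_opn mmap rows cols htin hsvB
        have := List.all_eq_true.mp hall f hf
        simp only [bne_iff_ne, ne_eq] at this
        exact this ((hR f t hfo hto).mpr hrf)
      rw [hstep, firstsAux, if_neg hguard]
      exact ih acc v sh wo hQ' hwf hacc hchar hsw

-- ---------- bridges between B's tally loop and A's per-component counts ----------
lemma countStep_eq (mmap : List String) (cols : Int) (parF : List Int)
    (d : PySem.Dict Int (Int × Int)) (p : Int × Int) :
    countStepB mmap cols parF d p.1 p.2 =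
      (if svB mmap p then
        d.insert (rootB parF (encC cols p))
          (if (cellC mmap p.1 p.2 == some 'o') then
            ((d.getD (rootB parF (encC cols p)) (0, 0)).1 + 1,
             (d.getD (rootB parF (encC cols p)) (0, 0)).2)
          else
            ((d.getD (rootB parF (encC cols p)) (0, 0)).1,
             (d.getD (rootB parF (encC cols p)) (0, 0)).2 + 1))
      else d) := by
  by_cases h : cellC mmap p.1 p.2 = some 'o' ∨ cellC mmap p.1 p.2 = some 'v'
  · have hsv : svB mmap p = true := (svB_iff mmap p).mpr h
    rw [countStepB]
    simp only
    rw [if_pos h, if_pos (by rw [hsv] : svB mmap p = true)]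
    by_cases h2 : cellC mmap p.1 p.2 = some 'o'
    · rw [if_pos h2, if_pos (by simp [h2] : (cellC mmap p.1 p.2 == some 'o') = true)]
      rfl
    · rw [if_neg h2, if_neg (by simp [h2] : ¬ ((cellC mmap p.1 p.2 == some 'o') = true))]
      rfl
  · have hsv : svB mmap p = false := by
      cases hb : svB mmap p
      · rfl
      · exact absurd ((svB_iff mmap p).mp hb) h
    rw [countStepB]
    simp only
    rw [if_neg h, if_neg (by simp [hsv])]


lemma length_filter_card (rows cols : Int) (pred : (Int × Int) → Bool)
    (P : (Int × Int) → Prop) (h : ∀ q, inB rows cols q → (pred q = true ↔ P q)) :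
    ((((cellsL rows cols).filter pred).length : Nat) : Int) =
      (((@Finset.filter _ P (Classical.decPred _) (grid rows cols)).card : Nat) : Int) := by
  classical
  have hfin : @Finset.filter _ P (Classical.decPred _) (grid rows cols) =
      ((cellsL rows cols).filter pred).toFinset := by
    ext q
    simp only [Finset.filter_congr_decidable, List.mem_toFinset, List.mem_filter,
      Finset.mem_filter, mem_grid, mem_cellsL]
    constructor
    · rintro ⟨hin, hP⟩
      exact ⟨hin, (h q hin).mpr hP⟩
    · rintro ⟨hin, hp⟩
      exact ⟨hin, (h q hin).mp hp⟩
  rw [hfin, List.toFinset_card_of_nodup ((nodup_cellsL rows cols).filter _)]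

-- ---------- the two programs, composed ----------
lemma main_aux (mmap : List String) (rows cols : Int) (hr : 0 ≤ rows) (hc : 0 ≤ cols) :
    (let st := (PySem.List.pyRange 0 rows 1).foldl (fun st row =>
        (PySem.List.pyRange 0 cols 1).foldl (fun st col =>
          outStepA mmap rows cols st row col) st)
        (List.replicate rows.toNat (List.replicate cols.toNat 0), 0, 0);
     [st.2.1, st.2.2]) =
    (let parent0 : List Int := PySem.List.pyRange 0 (rows * cols) 1;
     let parent := (PySem.List.pyRange 0 rows 1).foldl (fun par r =>
        (PySem.List.pyRange 0 cols 1).foldl (fun par c =>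
          edgeStepB mmap rows cols par r c) par) parent0;
     let d := (PySem.List.pyRange 0 rows 1).foldl (fun d r =>
        (PySem.List.pyRange 0 cols 1).foldl (fun d c =>
          countStepB mmap cols parent d r c) d) PySem.Dict.empty;
     let st := (PySem.Dict.values d).foldl
        (fun acc sw => if sw.1 > sw.2 then (acc.1 + sw.1, acc.2) else (acc.1, acc.2 + sw.2))
        ((0 : Int), (0 : Int));
     [st.1, st.2]) := by
  dsimp only
  rw [edge_fold_eq mmap rows cols (PySem.List.pyRange 0 (rows * cols) 1)]
  set parF := ((edgeCells mmap rows cols).map (fun e => (encC cols e.1, encC cols e.2))).foldl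
    (fun par e => unionB par e.1 e.2) (PySem.List.pyRange 0 (rows * cols) 1) with hparF
  rw [nested_eq_cells rows cols (fun st r c => outStepA mmap rows cols st r c)
    (List.replicate rows.toNat (List.replicate cols.toNat 0), 0, 0)]
  rw [nested_eq_cells rows cols (fun d r c => countStepB mmap cols parF d r c)
    PySem.Dict.empty]
  set rt := fun p : Int × Int => rootB parF (encC cols p) with hrtdef
  have hR : ∀ p q, opn mmap rows cols p → opn mmap rows cols q →
      (rt p = rt q ↔ Rch mmap rows cols p q) := by
    intro p q hp hq
    exact root_iff_Rch mmap rows cols hr hc hp hq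
  have hwf0 : wfM rows cols (List.replicate rows.toNat (List.replicate cols.toNat (0 : Int))) := by
    refine ⟨by simp, ?_, ?_⟩
    · intro r hrr
      simp only [List.mem_replicate] at hrr
      simp [hrr.2]
    · intro r hrr e he
      simp only [List.mem_replicate] at hrr
      rw [hrr.2] at he
      simp only [List.mem_replicate] at he
      exact Or.inl he.2
  have hchar0 : ∀ p, inB rows cols p →
      ((visM (List.replicate rows.toNat (List.replicate cols.toNat (0 : Int))) p) ↔
        ∃ f ∈ ([] : List (Int × Int)), Rch mmap rows cols f p) := by
    intro p hp
    simp [visM, getV_replicate]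
  obtain ⟨v', hA⟩ := A_loop mmap rows cols hr hc rt hR (cellsL rows cols) []
    (List.replicate rows.toNat (List.replicate cols.toNat 0)) 0 0
    (fun p hp => (mem_cellsL rows cols p).mp hp) hwf0 (by simp) hchar0 rfl
  rw [hA]
  have hstep_eq : (fun (st : PySem.Dict Int (Int × Int)) (p : Int × Int) =>
      countStepB mmap cols parF st p.1 p.2) =
      (fun d p => if svB mmap p then
        d.insert (rt p)
          (if (cellC mmap p.1 p.2 == some 'o') then
            ((d.getD (rt p) (0, 0)).1 + 1, (d.getD (rt p) (0, 0)).2)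
          else ((d.getD (rt p) (0, 0)).1, (d.getD (rt p) (0, 0)).2 + 1))
      else d) := by
    funext d p
    exact countStep_eq mmap cols parF d p
  rw [hstep_eq]
  have hvals : ∀ dd : PySem.Dict Int (Int × Int), PySem.Dict.values dd = dd.items.map (·.2) :=
    fun _ => rfl
  rw [hvals]
  rw [tallyLoop (svB mmap) (fun p => cellC mmap p.1 p.2 == some 'o') rt (cellsL rows cols) []
    (fun _ => ((0 : Int), (0 : Int))) PySem.Dict.empty (by simp) rfl]
  rw [List.map_map, List.foldl_map]
  have hfolds : (firstsAux (svB mmap) rt (cellsL rows cols) []).foldl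
      (fun (acc : Int × Int) f =>
        ((Prod.snd ∘ fun f => (rt f,
          ((if f ∈ ([] : List (Int × Int)) then ((fun _ => ((0 : Int), (0 : Int))) f).1 else 0) +
            cntB2 (svB mmap) (fun p => cellC mmap p.1 p.2 == some 'o') rt true f (cellsL rows cols),
           (if f ∈ ([] : List (Int × Int)) then ((fun _ => ((0 : Int), (0 : Int))) f).2 else 0) +
            cntB2 (svB mmap) (fun p => cellC mmap p.1 p.2 == some 'o') rt false f (cellsL rows cols)))) f) |>
          (fun sw => if sw.1 > sw.2 then (acc.1 + sw.1, acc.2) else (acc.1, acc.2 + sw.2)))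
      (0, 0) =
      (firstsAux (svB mmap) rt (cellsL rows cols) []).foldl (contrib mmap rows cols) (0, 0) := by
    apply PySem.List.foldl_congr_mem
    intro acc f hf
    have hmem := firstsAux_mem (svB mmap) rt (cellsL rows cols) [] f hf
    rcases hmem with hmem | ⟨hfQ, hsv, -⟩
    · simp at hmem
    · have hfin : inB rows cols f := (mem_cellsL rows cols f).mp hfQ
      have hfop : opn mmap rows cols f := sv_opn mmap rows cols hfin hsv
      have hO : cntB2 (svB mmap) (fun p => cellC mmap p.1 p.2 == some 'o') rt true f
          (cellsL rows cols) = compCnt mmap rows cols 'o' f := by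
        rw [cntB2, compCnt]
        apply length_filter_card
        intro q hq
        simp only [Bool.and_eq_true, beq_iff_eq, svB, Bool.or_eq_true]
        constructor
        · rintro ⟨⟨hrt, -⟩, hioq⟩
          have hqo : opn mmap rows cols q := ⟨hq, by rw [hioq]; decide⟩
          exact ⟨Rch_symm mmap rows cols hqo ((hR q f hqo hfop).mp hrt), hioq⟩
        · rintro ⟨hrch, hco⟩
          have hqo : opn mmap rows cols q := ⟨hq, by rw [hco]; decide⟩
          exact ⟨⟨(hR q f hqo hfop).mpr (Rch_symm mmap rows cols hfop hrch),
            Or.inl hco⟩, hco⟩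
      have hV : cntB2 (svB mmap) (fun p => cellC mmap p.1 p.2 == some 'o') rt false f
          (cellsL rows cols) = compCnt mmap rows cols 'v' f := by
        rw [cntB2, compCnt]
        apply length_filter_card
        intro q hq
        simp only [Bool.and_eq_true, beq_iff_eq, svB, Bool.or_eq_true, beq_eq_false_iff_ne,
          ne_eq]
        constructor
        · rintro ⟨⟨hrt, hor⟩, hnoto⟩
          have hcv : cellC mmap q.1 q.2 = some 'v' := by
            rcases hor with h | h
            · exact absurd h hnoto
            · exact h
          have hqo : opn mmap rows cols q := ⟨hq, by rw [hcv]; decide⟩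
          exact ⟨Rch_symm mmap rows cols hqo ((hR q f hqo hfop).mp hrt), hcv⟩
        · rintro ⟨hrch, hcv⟩
          have hqo : opn mmap rows cols q := ⟨hq, by rw [hcv]; decide⟩
          refine ⟨⟨(hR q f hqo hfop).mpr (Rch_symm mmap rows cols hfop hrch),
            Or.inr hcv⟩, ?_⟩
          rw [hcv]
          exact fun h => by simp at h
      simp only [Function.comp_apply, List.not_mem_nil, if_false, zero_add, hO, hV, contrib]
  rw [hfolds]

-- ===== VERDICT (by name: the statement is the Claim_ definition above) =====
theorem checkMap_spec : Claim_equal_checkMap := by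
  intro mmap hdom hpre
  show checkMap mmap = checkMap_alt mmap
  have h0r : (0 : Int) ≤ PySem.List.len mmap := by
    rw [PySem.List.len_eq]; positivity
  have h0c : (0 : Int) ≤ PySem.Str.len ((PySem.List.pyGet? mmap 0).getD "") := by
    rw [PySem.Str.len_eq]; positivity
  exact main_aux mmap _ _ h0r h0c
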